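-- pv_equiv track=rewrite | github.com/Rossignol-fr/frac2dec | frac2dec_v6.py | arrondi
-- ===== SOURCE A (Python) =====
-- def explose_dec(r):
--     """Transforme un décimal écrit sous forme de chaîne de caractères
--     en liste sous la forme: [sgn,pE,pF,p, apx] où sgn est le signe (1 ou -1)
--     pE la partie Entière, pF la partie décimale fixe, p la partie décimale
--     périodique et apx un booléen indiquant si c'est une valeur approchée"""
--     sgn = 1 # pour le signe
--     apx = False
--     if '~' in r: #Le nombre décimal est une valeur approchée
--         r = r[1:] #on retire le flag
--         apx = True
--     if r[0] == '-':
--         sgn = -1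
--         r = r[1:]
--     if '.' not in r: # c'est un entier
--         return sgn, r, '', '', apx
--     else:
--         pv = r.index('.') # donne la position du séparateur décimal
--         pE = r[:pv]
--     if '[' not in r:
--         return sgn, pE, r[pv+1:], '', apx
--     else:
--         pf = r.index('[') # pour la partie décimale périodique
--         return sgn, pE, r[pv+1:pf], r[pf+1:-1], apx
--
-- def arrondi(sd, n):
--     """Renvoie l'arrondi à n décimales du nombre décimal (string)"""
--     sgn, pE, pF, p, apx = explose_dec(sd)
--     while len(pF) < n + 1 and len(p) > 0:
--         pF+=p
--     if len(pF) < n + 1: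
--         return sd
--     else:
--         sn = pE + pF[:n + 1]
--         sg = ''
--         pv = len(pE)
--         if sgn == -1:
--             sg = '-'
--         if int(sn[-1])>=5:
--             nc = len(sn)
--             bz = '' #Pour le bourrage de zéros qui seront perdus
--             nc1 = len(str(int(sn)))
--             nc2 = len(str(int(sn)+5))
--             i = 0
--             if nc2 > nc1:
--                 i = 1
--             if nc1 < nc:
--                 bz = '0' * (nc-nc1+i)
--             sn = bz + str(int(sn) + 5)
--             return sg + sn[:pv+i] + '.' + sn[pv+i:-1]
--         else:
--             return sg + pE + '.' + pF[:n]
-- ===== SOURCE B (Python) =====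
-- def _parse(sd):
--     """Split sd into (neg, integer part, fixed decimals, periodic decimals)."""
--     s = sd
--     if '~' in s:
--         s = s[1:]
--     neg = s[:1] == '-'
--     if neg:
--         s = s[1:]
--     if '.' not in s:
--         return neg, s, '', ''
--     pv = s.index('.')
--     pE = s[:pv]
--     if '[' not in s:
--         return neg, pE, s[pv + 1:], ''
--     pf = s.index('[')
--     return neg, pE, s[pv + 1:pf], s[pf + 1:-1]
--
--
-- def _extend(pF, p, n):
--     """Repeat the period p after pF until at least n+1 decimals are available."""
--     if p:
--         while len(pF) < n + 1:
--             pF += p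
--     return pF
--
--
-- def _inc(kept):
--     """Add 1 to the digit list `kept`, right-to-left carry; returns (digits, grow)."""
--     i = len(kept) - 1
--     while i >= 0:
--         if kept[i] == '9':
--             kept[i] = '0'
--             i -= 1
--         else:
--             kept[i] = chr(ord(kept[i]) + 1)
--             return kept, 0
--     return ['1'] + kept, 1
--
--
-- def arrondi(sd, n):
--     """Round the decimal string sd to n decimals; round-half-up is an explicit
--     right-to-left carry over the kept digits instead of big-int +5 arithmetic."""
--     neg, pE, pF, p = _parse(sd)
--     pF = _extend(pF, p, n)
--     if len(pF) < n + 1: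
--         return sd
--     sg = '-' if neg else ''
--     digs = pE + pF[:n + 1]
--     if digs[-1] < '5':
--         return sg + pE + '.' + pF[:n]
--     body, grow = _inc(list(digs[:-1]))
--     cut = len(pE) + grow
--     return sg + ''.join(body[:cut]) + '.' + ''.join(body[cut:])
-- ===== Notes on version B (the rewrite author's own statement) =====
-- stated objective: alternative
-- what changed: B decides round-half-up by comparing the dropped digit with '5' and performs the increment as an explicit right-to-left carry over the kept digit list (prepending '1' on overflow), instead of A's conversion of the whole digit string to a big integer, adding 5, re-stringifying and re-padding zeros with length bookkeeping.
-- intended difference: On well-formed inputs whose kept digit string pE+pF[:n+1] starts with '0', ends with a digit >= 5 and whose other significant digits are all 9 (the carry overflows the significant digits of a number with leading zeros), A returns a malformed string with doubled zero padding and a shifted decimal point (e.g. '00.10' for arrondi('0.96',1)) while B returns the intended rounding ('1.0'). — e.g. on arrondi("0.96", 1): A returns "00.10", B returns "1.0"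
-- outside the precondition, e.g. on arrondi('5', -1): A returns '10.', B returns '1.'; on arrondi('a.45', 0): A returns 'a.', B returns 'a.'
import Mathlib
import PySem

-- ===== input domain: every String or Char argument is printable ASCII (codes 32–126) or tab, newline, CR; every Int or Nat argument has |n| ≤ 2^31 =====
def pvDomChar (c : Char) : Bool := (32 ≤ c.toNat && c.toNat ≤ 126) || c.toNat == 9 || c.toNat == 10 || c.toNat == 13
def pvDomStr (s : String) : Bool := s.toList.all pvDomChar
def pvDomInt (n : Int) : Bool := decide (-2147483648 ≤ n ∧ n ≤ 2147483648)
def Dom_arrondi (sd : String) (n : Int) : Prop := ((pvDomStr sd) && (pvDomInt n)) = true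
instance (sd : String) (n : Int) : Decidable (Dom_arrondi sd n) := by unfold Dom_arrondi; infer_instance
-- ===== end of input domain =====

-- B replaces A's big-integer `int(sn)+5` rounding (with its zero-padding and length
-- bookkeeping) by an explicit right-to-left carry over the kept digit list (objective:
-- alternative). A's accidental leading-zero/carry-overflow outputs are stated in D_ below.

-- ===== PORT A =====

-- int(s) ported by hand, mirroring CPython exactly: strip whitespace, optional sign,
-- digits with a single '_' allowed between digits; none = ValueError.
def pyIntSpace (c : Char) : Bool :=
  c == ' ' || c == '\t' || c == '\n' || c == '\r' || c == '\x0b' || c == '\x0c'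

def pyIntDigits? : List Char → Bool → Nat → Option Nat
  | [], afterDigit, acc => if afterDigit then some acc else none
  | c :: rest, afterDigit, acc =>
    if c.isDigit then pyIntDigits? rest true (acc * 10 + (c.toNat - '0'.toNat))
    else if c = '_' ∧ afterDigit then
      match rest with
      | d :: _ => if d.isDigit then pyIntDigits? rest false acc else none
      | [] => none
    else none

def pyInt? (cs : List Char) : Option Int :=
  let t := ((cs.dropWhile pyIntSpace).reverse.dropWhile pyIntSpace).reverse
  match t with
  | '-' :: ds => (pyIntDigits? ds false 0).map (fun a => -(a : Int))
  | '+' :: ds => (pyIntDigits? ds false 0).map (fun a => (a : Int))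
  | ds => (pyIntDigits? ds false 0).map (fun a => (a : Int))

-- explose_dec: on the empty (after '~' strip) string Python raises IndexError at r[0];
-- there the port treats the sign test as false (excluded by Pre_).
def explose_dec (r0 : List Char) : Int × List Char × List Char × List Char × Bool :=
  let s1 := if r0.contains '~' then (r0.drop 1, true) else (r0, false)
  let r1 := s1.1
  let apx := s1.2
  let s2 := if r1.head? = some '-' then ((-1 : Int), r1.drop 1) else ((1 : Int), r1)
  let sgn := s2.1
  let r := s2.2
  if ¬ r.contains '.' then (sgn, r, [], [], apx)
  else
    let pv := r.idxOf '.'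
    let pE := r.take pv
    if ¬ r.contains '[' then (sgn, pE, r.drop (pv + 1), [], apx)
    else
      let pf := r.idxOf '['
      (sgn, pE, PySem.List.slice r (some ((pv : Int) + 1)) (some (pf : Int)),
        PySem.List.slice r (some ((pf : Int) + 1)) (some (-1)), apx)

-- the while loop `while len(pF) < n + 1 and len(p) > 0: pF += p`; the Nat argument is
-- fuel making the loop structurally total (each pass adds ≥ 1 digit, so
-- (n + 1 - len(pF)).toNat passes always suffice; the loop condition is re-checked each pass)
def extendLoopA (p : List Char) (n : Int) : Nat → List Char → List Char
  | 0, pF => pF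
  | k + 1, pF =>
    if ((pF.length : Int) < n + 1 ∧ 0 < p.length) then extendLoopA p n k (pF ++ p) else pF

def extendA (pF p : List Char) (n : Int) : List Char :=
  extendLoopA p n (n + 1 - pF.length).toNat pF

def arrondi (sd : String) (n : Int) : String :=
  let e := explose_dec sd.toList
  let sgn := e.1
  let pE := e.2.1
  let p := e.2.2.2.1
  let pF := extendA e.2.2.1 p n
  if (pF.length : Int) < n + 1 then sd
  else
    let sn := pE ++ PySem.List.slice pF none (some (n + 1))
    let sg : List Char := if sgn = -1 then ['-'] else []
    let pv := pE.length
    match PySem.List.pyGet? sn (-1) with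
    | none => ""                                  -- IndexError (excluded by Pre_)
    | some lc =>
      match pyInt? [lc] with
      | none => ""                                -- ValueError (excluded by Pre_)
      | some dl =>
        if 5 ≤ dl then
          match pyInt? sn with
          | none => ""                            -- ValueError (excluded by Pre_)
          | some v =>
            let nc := sn.length
            let nc1 := (PySem.Int.toChars v).length
            let nc2 := (PySem.Int.toChars (v + 5)).length
            let i := if nc1 < nc2 then 1 else 0
            let bz : List Char := if nc1 < nc then List.replicate (nc - nc1 + i) '0' else []
            let sn2 := bz ++ PySem.Int.toChars (v + 5)
            String.ofList (sg ++ sn2.take (pv + i) ++ '.' :: (sn2.drop (pv + i)).dropLast)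
        else String.ofList (sg ++ pE ++ '.' :: PySem.List.slice pF none (some n))

-- ===== PORT B =====

-- _parse(sd) of Source B
def parseB (sd : List Char) : Bool × List Char × List Char × List Char :=
  let s1 := if sd.contains '~' then sd.drop 1 else sd
  let neg := s1.take 1 = ['-']
  let s := if neg then s1.drop 1 else s1
  if ¬ s.contains '.' then (neg, s, [], [])
  else
    let pv := s.idxOf '.'
    let pE := s.take pv
    if ¬ s.contains '[' then (neg, pE, s.drop (pv + 1), [])
    else
      let pf := s.idxOf '['
      (neg, pE, PySem.List.slice s (some ((pv : Int) + 1)) (some (pf : Int)),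
        PySem.List.slice s (some ((pf : Int) + 1)) (some (-1)))

-- _extend(pF, p, n) of Source B: the inner while, with the same structural fuel as above
-- (the `p ≠ []` conjunct makes one fuel unit always enough progress; Source B checks `if p:`
-- once outside and the caller below does the same)
def extendLoopB (p : List Char) (n : Int) : Nat → List Char → List Char
  | 0, pF => pF
  | k + 1, pF =>
    if ((pF.length : Int) < n + 1 ∧ p ≠ []) then extendLoopB p n k (pF ++ p) else pF

def extendB (pF p : List Char) (n : Int) : List Char :=
  extendLoopB p n (n + 1 - pF.length).toNat pF

-- _inc(kept) of Source B: the right-to-left index loop, as structural recursion on the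
-- reversed digit list (carryRev sees the last digit first)
def carryRev : List Char → List Char × Bool
  | [] => ([], true)
  | c :: rest =>
    if c = '9' then
      let r := carryRev rest
      ('0' :: r.1, r.2)
    else (Char.ofNat (c.toNat + 1) :: rest, false)

def incB (kept : List Char) : List Char × Nat :=
  let r := carryRev kept.reverse
  if r.2 then ('1' :: r.1.reverse, 1) else (r.1.reverse, 0)

def arrondi_alt (sd : String) (n : Int) : String :=
  let P := parseB sd.toList
  let neg := P.1
  let pE := P.2.1
  let p := P.2.2.2
  let pF := if p ≠ [] then extendB P.2.2.1 p n else P.2.2.1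
  if (pF.length : Int) < n + 1 then sd
  else
    let sg : List Char := if neg then ['-'] else []
    let digs := pE ++ PySem.List.slice pF none (some (n + 1))
    match PySem.List.pyGet? digs (-1) with
    | none => ""                                  -- IndexError (excluded by Pre_)
    | some c =>
      if c < '5' then String.ofList (sg ++ pE ++ '.' :: PySem.List.slice pF none (some n))
      else
        let r := incB digs.dropLast
        let cut := pE.length + r.2
        String.ofList (sg ++ r.1.take cut ++ '.' :: r.1.drop cut)

-- ===== PRECONDITION & SPEC =====

-- Pre_ excludes: negative n (a negative decimal count is outside the task's natural
-- domain; A's values there are slicing accidents), the empty string after '~'-stripping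
-- (A raises IndexError at r[0]), and malformed strings whose '.'-part reaches the
-- rounding code (there A generally raises ValueError in int(); where int() happens to
-- tolerate the string, A's value hinges on that accident).
def Pre_arrondi (sd : String) (n : Int) : Prop :=
  let v := if sd.toList.contains '~' then sd.toList.tail else sd.toList
  let r := if v.head? = some '-' then v.tail else v
  let rest := (r.dropWhile (· ≠ '.')).tail
  0 ≤ n ∧ v ≠ [] ∧
    (r.contains '.' = false ∨
      (r.contains '[' = false ∧ (rest.length : Int) < n + 1) ∨
      (r.contains '.' = true ∧
        (r.takeWhile (· ≠ '.') ++ rest.takeWhile (· ≠ '[') ++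
          (rest.dropWhile (· ≠ '[')).tail.dropLast).all
            (fun c => decide (48 ≤ c.toNat ∧ c.toNat ≤ 57)) = true))

instance (sd : String) (n : Int) : Decidable (Pre_arrondi sd n) := by
  unfold Pre_arrondi; infer_instance

def pvWitness_arrondi : String × Int := ("12.345", 2)

-- On well-formed inputs whose kept digit string `pE + pF[:n+1]` starts with '0', ends
-- with a digit ≥ 5 and whose remaining significant digits are all 9 (the rounding carry
-- overflows the significant digits of a number with leading zeros), A returns a malformed
-- string with doubled zero padding and a shifted decimal point (e.g. '00.10' for
-- arrondi('0.96', 1)), while B returns the intended rounding ('1.0').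
def D_arrondi (sd : String) (n : Int) : Prop :=
  let v := if sd.toList.contains '~' then sd.toList.tail else sd.toList
  let r := if v.head? = some '-' then v.tail else v
  let rest := (r.dropWhile (· ≠ '.')).tail
  let fx := rest.takeWhile (· ≠ '[')
  let per := (rest.dropWhile (· ≠ '[')).tail.dropLast
  let digs := r.takeWhile (· ≠ '.') ++
    (fx ++ (List.replicate (n + 1).toNat per).flatten).take (n + 1).toNat
  0 ≤ n ∧ v ≠ [] ∧ r.contains '.' = true ∧
    (r.takeWhile (· ≠ '.') ++ fx ++ per).all (fun c => decide (48 ≤ c.toNat ∧ c.toNat ≤ 57)) = true ∧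
    ((n + 1 : Int) ≤ (fx.length : Int) ∨ per ≠ []) ∧
    digs.head? = some '0' ∧
    (digs.getLast?.any fun c => decide ('5' ≤ c)) = true ∧
    (digs.dropLast.dropWhile (· = '0')).all (· = '9') = true

instance (sd : String) (n : Int) : Decidable (D_arrondi sd n) := by
  unfold D_arrondi; infer_instance

def Spec_arrondi (sd : String) (n : Int) (out : String) : Prop :=
  ¬ D_arrondi sd n → out = arrondi_alt sd n

instance (sd : String) (n : Int) (out : String) : Decidable (Spec_arrondi sd n out) := by
  unfold Spec_arrondi; infer_instance

def pvDiffWitness_arrondi : String × Int := ("0.96", 1)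

def pvDiffWitnessOut_arrondi : String × String := ("00.10", "1.0")

-- ===== CLAIM (what is proved, stated in full; the proofs are below) =====
def Claim_unchanged_arrondi : Prop :=
  ∀ (sd : String) (n : Int), Dom_arrondi sd n → Pre_arrondi sd n → Spec_arrondi sd n (arrondi sd n)

def Claim_changed_arrondi : Prop :=
  Dom_arrondi (pvDiffWitness_arrondi.1) (pvDiffWitness_arrondi.2) ∧
  Pre_arrondi (pvDiffWitness_arrondi.1) (pvDiffWitness_arrondi.2) ∧
  D_arrondi (pvDiffWitness_arrondi.1) (pvDiffWitness_arrondi.2) ∧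
  arrondi (pvDiffWitness_arrondi.1) (pvDiffWitness_arrondi.2) = pvDiffWitnessOut_arrondi.1 ∧
  arrondi_alt (pvDiffWitness_arrondi.1) (pvDiffWitness_arrondi.2) = pvDiffWitnessOut_arrondi.2 ∧
  pvDiffWitnessOut_arrondi.1 ≠ pvDiffWitnessOut_arrondi.2

def Claim_exact_arrondi : Prop :=
  ∀ (sd : String) (n : Int), Dom_arrondi sd n → Pre_arrondi sd n → D_arrondi sd n →
    arrondi sd n ≠ arrondi_alt sd n

-- ===== LEMMAS AND PROOFS =====

-- Shape helpers for Pre_/D_ only: the decimal-literal SHAPE of the input string, read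
-- off with takeWhile/dropWhile splits (no run of either algorithm).
def pvDig (c : Char) : Bool := decide (48 ≤ c.toNat ∧ c.toNat ≤ 57)  -- '0' ≤ c ≤ '9'

-- the string after A's flag stripping: one char dropped if '~' occurs, a leading '-' dropped
def pvBody (u : List Char) : List Char :=
  let v := if u.contains '~' then u.tail else u
  if v.head? = some '-' then v.tail else v

def pvPE (r : List Char) : List Char := r.takeWhile (· ≠ '.')        -- integer part
def pvRest (r : List Char) : List Char := (r.dropWhile (· ≠ '.')).tail  -- after the first '.'
def pvFx (r : List Char) : List Char := (pvRest r).takeWhile (· ≠ '[')  -- fixed decimals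
def pvTl (r : List Char) : List Char := (pvRest r).dropWhile (· ≠ '[')  -- "[period]" tail (or [])
def pvPer (r : List Char) : List Char := (pvTl r).tail.dropLast         -- periodic decimals

-- the digit string `pE + pF[:n+1]` that the rounding inspects (period unrolled cyclically)
def pvDigs (r : List Char) (n : Int) : List Char :=
  pvPE r ++ (pvFx r ++ (List.replicate (n + 1).toNat (pvPer r)).flatten).take (n + 1).toNat


-- ---------- digit values ----------
def pvDval (c : Char) : Nat := c.toNat - 48

def pvVal (l : List Char) : Nat := l.foldl (fun a c => 10 * a + pvDval c) 0

lemma pvVal_from (l : List Char) (a : Nat) :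
    l.foldl (fun a c => 10 * a + pvDval c) a = a * 10 ^ l.length + pvVal l := by
  induction l generalizing a with
  | nil => simp [pvVal]
  | cons c t ih =>
    simp only [List.foldl_cons, List.length_cons, pvVal]
    rw [ih (10 * a + pvDval c), ih (10 * 0 + pvDval c)]
    ring

lemma pvVal_append (xs ys : List Char) :
    pvVal (xs ++ ys) = pvVal xs * 10 ^ ys.length + pvVal ys := by
  simp only [pvVal, List.foldl_append]
  rw [pvVal_from ys (List.foldl (fun a c => 10 * a + pvDval c) 0 xs)]
  simp [pvVal]

lemma pvVal_concat (xs : List Char) (c : Char) :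
    pvVal (xs ++ [c]) = 10 * pvVal xs + pvDval c := by
  rw [pvVal_append]; simp [pvVal, pvDval]; ring

lemma pvVal_cons (c : Char) (t : List Char) :
    pvVal (c :: t) = pvDval c * 10 ^ t.length + pvVal t := by
  simp only [pvVal, List.foldl_cons]
  rw [pvVal_from]; simp [pvVal]

lemma pvDig_dval_lt {c : Char} (h : pvDig c = true) : pvDval c < 10 := by
  simp only [pvDig, decide_eq_true_eq] at h
  simp only [pvDval]; omega

lemma pvVal_lt {l : List Char} (h : ∀ c ∈ l, pvDig c = true) : pvVal l < 10 ^ l.length := by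
  induction l with
  | nil => simp [pvVal]
  | cons c t ih =>
    rw [pvVal_cons]
    have h1 := pvDig_dval_lt (h c (by simp))
    have h2 := ih (fun d hd => h d (by simp [hd]))
    have : pvDval c * 10 ^ t.length ≤ 9 * 10 ^ t.length :=
      Nat.mul_le_mul_right _ (by omega)
    simp only [List.length_cons, pow_succ]
    omega

lemma pvDig_cases {c : Char} (h : pvDig c = true) :
    c = '0' ∨ c = '1' ∨ c = '2' ∨ c = '3' ∨ c = '4' ∨ c = '5' ∨ c = '6' ∨ c = '7' ∨ c = '8' ∨ c = '9' := by
  simp only [pvDig, decide_eq_true_eq] at h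
  obtain ⟨h1, h2⟩ := h
  have he : Char.ofNat c.toNat = c := Char.ofNat_toNat c
  interval_cases hc : c.toNat <;> rw [← he] <;> decide

-- ---------- decimal digit lists of a Nat (big-endian), agreeing with Nat.toDigits 10 ----------
def myDigs (m : Nat) : List Char :=
  if h : m < 10 then [Nat.digitChar m]
  else myDigs (m / 10) ++ [Nat.digitChar (m % 10)]
  termination_by m
  decreasing_by exact Nat.div_lt_self (by omega) (by omega)

lemma myDigs_small {m : Nat} (h : m < 10) : myDigs m = [Nat.digitChar m] := by
  rw [myDigs]; simp [h]

lemma myDigs_step {a b : Nat} (ha : 0 < a) (hb : b < 10) :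
    myDigs (10 * a + b) = myDigs a ++ [Nat.digitChar b] := by
  rw [myDigs]
  have h10 : ¬ (10 * a + b < 10) := by omega
  have hd : (10 * a + b) / 10 = a := by omega
  have hm : (10 * a + b) % 10 = b := by omega
  simp [h10, hd, hm]

lemma digitChar_toNat {b : Nat} (hb : b < 10) : (Nat.digitChar b).toNat = 48 + b := by
  interval_cases b <;> decide

lemma digitChar_dig {b : Nat} (hb : b < 10) : pvDig (Nat.digitChar b) = true := by
  interval_cases b <;> decide

lemma digitChar_dval {b : Nat} (hb : b < 10) : pvDval (Nat.digitChar b) = b := by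
  simp [pvDval, digitChar_toNat hb]

lemma digitChar_ne_zero {b : Nat} (hb0 : 0 < b) (hb : b < 10) : Nat.digitChar b ≠ '0' := by
  interval_cases b <;> decide

lemma dig_digitChar_dval {c : Char} (h : pvDig c = true) : Nat.digitChar (pvDval c) = c := by
  rcases pvDig_cases h with h|h|h|h|h|h|h|h|h|h <;> subst h <;> decide

lemma myDigs_ne_nil (m : Nat) : myDigs m ≠ [] := by
  by_cases h : m < 10
  · simp [myDigs_small h]
  · rw [myDigs]; simp [h]

lemma myDigs_all_dig (m : Nat) : ∀ c ∈ myDigs m, pvDig c = true := by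
  induction m using Nat.strong_induction_on with
  | _ m ih =>
    by_cases h : m < 10
    · simp [myDigs_small h, digitChar_dig h]
    · have h1 : 0 < m / 10 := by omega
      have := ih (m / 10) (Nat.div_lt_self (by omega) (by omega))
      rw [myDigs]
      simp only [h, dite_false]
      intro c hc
      rcases List.mem_append.mp hc with hc | hc
      · exact this c hc
      · simp at hc; subst hc; exact digitChar_dig (Nat.mod_lt _ (by omega))

lemma myDigs_val (m : Nat) : pvVal (myDigs m) = m := by
  induction m using Nat.strong_induction_on with
  | _ m ih =>
    by_cases h : m < 10
    · simp [myDigs_small h, pvVal, digitChar_dval h]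
    · have hrec := ih (m / 10) (Nat.div_lt_self (by omega) (by omega))
      rw [myDigs]
      simp only [h, dite_false]
      rw [pvVal_concat, hrec, digitChar_dval (Nat.mod_lt _ (by omega))]
      omega

lemma myDigs_len_pos (m : Nat) : 1 ≤ (myDigs m).length :=
  List.length_pos_of_ne_nil (myDigs_ne_nil m)

lemma myDigs_lt (m : Nat) : m < 10 ^ (myDigs m).length := by
  have := pvVal_lt (l := myDigs m) (myDigs_all_dig m)
  rwa [myDigs_val] at this

lemma myDigs_ge (m : Nat) (hm : 1 ≤ m) : 10 ^ ((myDigs m).length - 1) ≤ m := by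
  induction m using Nat.strong_induction_on with
  | _ m ih =>
    by_cases h : m < 10
    · simp [myDigs_small h]; omega
    · have h1 : 0 < m / 10 := by omega
      have hrec := ih (m / 10) (Nat.div_lt_self (by omega) (by omega)) h1
      rw [myDigs]
      simp only [h, dite_false, List.length_append, List.length_cons, List.length_nil]
      have hl := myDigs_len_pos (m / 10)
      have : 10 ^ ((myDigs (m / 10)).length + 1 - 1) = 10 ^ ((myDigs (m / 10)).length - 1) * 10 := by
        rw [← pow_succ]
        congr 1
        omega
      rw [this]
      have : 10 ^ ((myDigs (m / 10)).length - 1) * 10 ≤ (m / 10) * 10 :=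
        Nat.mul_le_mul_right _ hrec
      omega

lemma myDigs_len_le {m k : Nat} (hk : 1 ≤ k) (h : m < 10 ^ k) : (myDigs m).length ≤ k := by
  by_contra hc
  push_neg at hc
  have := myDigs_ge m
  by_cases hm : 1 ≤ m
  · have h2 := myDigs_ge m hm
    have h3 : (10:Nat) ^ k ≤ 10 ^ ((myDigs m).length - 1) :=
      Nat.pow_le_pow_right (by omega) (by omega)
    omega
  · have hm0 : m = 0 := by omega
    subst hm0
    have hl0 : (myDigs 0).length = 1 := by rw [myDigs_small (show (0:Nat) < 10 by omega)]; rfl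
    omega

lemma myDigs_head_ne_zero {m : Nat} (hm : 0 < m) : (myDigs m).head? ≠ some '0' := by
  induction m using Nat.strong_induction_on with
  | _ m ih =>
    by_cases h : m < 10
    · simp [myDigs_small h]
      exact digitChar_ne_zero hm h
    · have h1 : 0 < m / 10 := by omega
      have hrec := ih (m / 10) (Nat.div_lt_self (by omega) (by omega)) h1
      rw [myDigs]
      simp only [h, dite_false]
      rwa [List.head?_append_of_ne_nil _ (myDigs_ne_nil _)]

lemma myDigs_len_succ (m : Nat) :
    ((myDigs (m + 1)).length = (myDigs m).length ∧ m + 1 ≠ 10 ^ (myDigs m).length) ∨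
    (m + 1 = 10 ^ (myDigs m).length ∧ (myDigs (m + 1)).length = (myDigs m).length + 1) := by
  have hlt := myDigs_lt m
  by_cases he : m + 1 = 10 ^ (myDigs m).length
  · right
    refine ⟨he, ?_⟩
    have h1 : (myDigs (m+1)).length ≤ (myDigs m).length + 1 := by
      apply myDigs_len_le (by omega)
      rw [he, pow_succ]
      have : (0:Nat) < 10 ^ (myDigs m).length := Nat.pow_pos (by omega)
      omega
    have h2 : (myDigs m).length < (myDigs (m+1)).length := by
      have := myDigs_ge (m+1) (by omega)
      by_contra hc
      push_neg at hc
      have h3 : 10 ^ (myDigs m).length ≤ m + 1 := by rw [he]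
      have h4 : (myDigs (m+1)).length - 1 < (myDigs (m+1)).length := by
        have := myDigs_len_pos (m+1); omega
      have h5 : m + 1 < 10 ^ (myDigs (m+1)).length := myDigs_lt (m+1)
      have h6 : 10 ^ (myDigs (m+1)).length ≤ 10 ^ (myDigs m).length :=
        Nat.pow_le_pow_right (by omega) hc
      omega
    omega
  · left
    refine ⟨?_, he⟩
    have h1 : (myDigs (m+1)).length ≤ (myDigs m).length := by
      apply myDigs_len_le (myDigs_len_pos m)
      omega
    have h2 : (myDigs m).length ≤ (myDigs (m+1)).length := by
      by_cases hm : 1 ≤ m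
      · have := myDigs_ge m hm
        have h3 : 10 ^ ((myDigs m).length - 1) ≤ m + 1 := by omega
        have h4 := myDigs_lt (m+1)
        by_contra hc
        push_neg at hc
        have h5 : 10 ^ (myDigs (m+1)).length ≤ 10 ^ ((myDigs m).length - 1) :=
          Nat.pow_le_pow_right (by omega) (by omega)
        omega
      · have hm0 : m = 0 := by omega
        subst hm0
        simp [myDigs_small (show (0:Nat) < 10 by omega), myDigs_small (show (1:Nat) < 10 by omega)]
    omega

lemma myDigs_pow (k : Nat) : myDigs (10 ^ k) = '1' :: List.replicate k '0' := by
  induction k with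
  | zero => rw [pow_zero, myDigs_small (by omega)]; decide
  | succ k ih =>
    have : (10:Nat) ^ (k+1) = 10 * 10 ^ k + 0 := by ring
    rw [this, myDigs_step (Nat.pow_pos (by omega)) (by omega), ih]
    have hz : Nat.digitChar 0 = '0' := by decide
    simp [hz, List.replicate_succ']

lemma toDigitsCore_eq (m : Nat) : ∀ f ds, m < f → Nat.toDigitsCore 10 f m ds = myDigs m ++ ds := by
  induction m using Nat.strong_induction_on with
  | _ m ih =>
    intro f ds hf
    match f with
    | f + 1 =>
      rw [Nat.toDigitsCore]
      by_cases h : m < 10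
      · have h0 : m / 10 = 0 := by omega
        have hm : m % 10 = m := by omega
        simp [h0, hm, myDigs_small h]
      · have h0 : ¬ (m / 10 = 0) := by omega
        simp only [h0, if_false]
        rw [ih (m / 10) (Nat.div_lt_self (by omega) (by omega)) f (Nat.digitChar (m % 10) :: ds) (by omega)]
        conv_rhs => rw [myDigs]
        simp [h]

lemma toChars_nonneg {v : Int} (hv : 0 ≤ v) : PySem.Int.toChars v = myDigs v.toNat := by
  rw [PySem.Int.toChars]
  have : ¬ v < 0 := by omega
  simp only [this, if_false]
  rw [Nat.toDigits, toDigitsCore_eq _ _ _ (by omega)]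
  simp

-- ---------- canonical form of digit lists ----------
lemma dval_eq_zero {c : Char} (h : pvDig c = true) (h0 : pvDval c = 0) : c = '0' := by
  have := dig_digitChar_dval h
  rw [h0] at this
  rw [← this]; rfl

lemma dval_eq_nine {c : Char} (h : pvDig c = true) (h9 : pvDval c = 9) : c = '9' := by
  have := dig_digitChar_dval h
  rw [h9] at this
  rw [← this]; rfl

lemma pvVal_zero_all {u : List Char} (hd : ∀ c ∈ u, pvDig c = true) (h : pvVal u = 0) :
    u = List.replicate u.length '0' := by
  induction u with
  | nil => rfl
  | cons c t ih =>
    rw [pvVal_cons] at h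
    have hc : pvDval c = 0 := by
      have := Nat.pow_pos (n := t.length) (show 0 < 10 by omega)
      nlinarith [Nat.eq_zero_of_add_eq_zero_right h]
    have ht : pvVal t = 0 := by omega
    have hc0 : c = '0' := dval_eq_zero (hd c (by simp)) hc
    subst hc0
    rw [List.length_cons, List.replicate_succ]
    rw [← ih (fun d hd' => hd d (by simp [hd'])) ht]

lemma pvCF {u : List Char} (hd : ∀ c ∈ u, pvDig c = true) (hv : 0 < pvVal u) :
    u = List.replicate (u.length - (myDigs (pvVal u)).length) '0' ++ myDigs (pvVal u) ∧
    (myDigs (pvVal u)).length ≤ u.length := by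
  induction u using List.reverseRecOn with
  | nil => simp [pvVal] at hv
  | append_singleton t c ih =>
    rw [pvVal_concat] at hv ⊢
    have hdc : pvDig c = true := hd c (by simp)
    have hdt : ∀ d ∈ t, pvDig d = true := fun d hd' => hd d (by simp [hd'])
    have hdl : pvDval c < 10 := pvDig_dval_lt hdc
    by_cases hvt : 0 < pvVal t
    · obtain ⟨hcf, hle⟩ := ih hdt hvt
      rw [myDigs_step hvt hdl, dig_digitChar_dval hdc]
      constructor
      · conv_lhs => rw [hcf]
        simp only [List.length_append, List.length_cons, List.length_nil, List.append_assoc]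
        congr 2
        omega
      · simp only [List.length_append, List.length_cons, List.length_nil]
        omega
    · have hvt0 : pvVal t = 0 := by omega
      rw [hvt0] at hv ⊢
      have hrep := pvVal_zero_all hdt hvt0
      have hmd : myDigs (10 * 0 + pvDval c) = [c] := by
        rw [Nat.mul_zero, Nat.zero_add, myDigs_small hdl, dig_digitChar_dval hdc]
      rw [hmd]
      constructor
      · conv_lhs => rw [hrep]
        simp
      · simp only [List.length_append, List.length_cons, List.length_nil]
        omega

lemma pvAllNine_iff {u : List Char} (hd : ∀ c ∈ u, pvDig c = true) :
    u.all (· = '9') = true ↔ pvVal u = 10 ^ u.length - 1 := by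
  induction u with
  | nil => simp [pvVal]
  | cons c t ih =>
    rw [pvVal_cons]
    have hdc := hd c (by simp)
    have hdt : ∀ d ∈ t, pvDig d = true := fun d hd' => hd d (by simp [hd'])
    have hdl := pvDig_dval_lt hdc
    have hvt := pvVal_lt hdt
    have hq : (0:Nat) < 10 ^ t.length := Nat.pow_pos (by omega)
    constructor
    · intro h
      simp only [List.all_cons, Bool.and_eq_true, decide_eq_true_eq] at h
      obtain ⟨hc9, ht9⟩ := h
      have h9 : pvDval c = 9 := by subst hc9; rfl
      have := (ih hdt).mp ht9
      rw [h9, this]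
      simp only [List.length_cons, pow_succ]
      omega
    · intro h
      simp only [List.length_cons, pow_succ] at h
      have h9 : pvDval c = 9 := by
        by_contra hne
        have h8 : pvDval c ≤ 8 := by omega
        have : pvDval c * 10 ^ t.length ≤ 8 * 10 ^ t.length :=
          Nat.mul_le_mul_right _ h8
        omega
      have hvt9 : pvVal t = 10 ^ t.length - 1 := by
        have : pvDval c * 10 ^ t.length = 9 * 10 ^ t.length := by rw [h9]
        omega
      simp only [List.all_cons, Bool.and_eq_true, decide_eq_true_eq]
      exact ⟨dval_eq_nine hdc h9, (ih hdt).mpr hvt9⟩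

lemma dropWhile0_rep (k : Nat) (l : List Char) :
    (List.replicate k '0' ++ l).dropWhile (· = '0') = l.dropWhile (· = '0') := by
  induction k with
  | zero => simp
  | succ k ih => simpa [List.replicate_succ]

lemma dropWhile0_of_head_ne {l : List Char} (h : l.head? ≠ some '0') :
    l.dropWhile (· = '0') = l := by
  cases l with
  | nil => rfl
  | cons c t =>
    simp only [List.head?_cons, ne_eq, Option.some.injEq] at h
    simp [List.dropWhile_cons, h]

lemma dropWhile0_eq_myDigs {u : List Char} (hd : ∀ c ∈ u, pvDig c = true) (hv : 0 < pvVal u) :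
    u.dropWhile (· = '0') = myDigs (pvVal u) := by
  obtain ⟨hcf, _⟩ := pvCF hd hv
  conv_lhs => rw [hcf]
  rw [dropWhile0_rep]
  exact dropWhile0_of_head_ne (myDigs_head_ne_zero hv)

-- ---------- the right-to-left carry computes myDigs (value + 1) ----------
lemma chr_succ_digitChar {c : Char} (h : pvDig c = true) (h9 : c ≠ '9') :
    Char.ofNat (c.toNat + 1) = Nat.digitChar (pvDval c + 1) := by
  rcases pvDig_cases h with h'|h'|h'|h'|h'|h'|h'|h'|h'|h' <;> subst h' <;> first | decide | exact absurd rfl h9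

lemma dval_le_eight {c : Char} (h : pvDig c = true) (h9 : c ≠ '9') : pvDval c ≤ 8 := by
  rcases pvDig_cases h with h'|h'|h'|h'|h'|h'|h'|h'|h'|h' <;> subst h' <;> first | decide | exact absurd rfl h9

lemma carryRev_spec {t : List Char} (hd : ∀ c ∈ t, pvDig c = true) :
    (t.all (· = '9') = true → carryRev t.reverse = (List.replicate t.length '0', true)) ∧
    (t.all (· = '9') = false →
      carryRev t.reverse =
        ((List.replicate (t.length - (myDigs (pvVal t + 1)).length) '0' ++ myDigs (pvVal t + 1)).reverse, false) ∧
      (myDigs (pvVal t + 1)).length ≤ t.length) := by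
  induction t using List.reverseRecOn with
  | nil => constructor
           · intro _; rfl
           · intro h; simp at h
  | append_singleton s c ih =>
    have hdc : pvDig c = true := hd c (by simp)
    have hds : ∀ d ∈ s, pvDig d = true := fun d hd' => hd d (by simp [hd'])
    have ihs := ih hds
    have hrev : (s ++ [c]).reverse = c :: s.reverse := by simp
    by_cases h9 : c = '9'
    · subst h9
      constructor
      · intro hall
        have hs9 : s.all (· = '9') = true := by
          simp only [List.all_append] at hall
          exact (Bool.and_eq_true _ _).mp hall |>.1
        rw [hrev, carryRev]
        simp only [if_pos rfl]
        rw [ihs.1 hs9]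
        simp [List.replicate_succ, List.length_append]
      · intro hall
        have hs9 : s.all (· = '9') = false := by
          simp only [List.all_append, List.all_cons, List.all_nil] at hall
          simpa using hall
        obtain ⟨hcr, hle⟩ := ihs.2 hs9
        rw [hrev, carryRev]
        simp only [if_pos rfl]
        rw [hcr]
        have hv : pvVal (s ++ ['9']) + 1 = 10 * (pvVal s + 1) + 0 := by
          rw [pvVal_concat]
          have : pvDval '9' = 9 := rfl
          omega
        have hmd : myDigs (pvVal (s ++ ['9']) + 1) = myDigs (pvVal s + 1) ++ ['0'] := by
          rw [hv, myDigs_step (by omega) (by omega)]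
          rfl
        constructor
        · rw [hmd]
          simp only [List.length_append, List.length_cons, List.length_nil]
          have harr : s.length + 1 - ((myDigs (pvVal s + 1)).length + 1)
              = s.length - (myDigs (pvVal s + 1)).length := by omega
          rw [harr]
          simp [List.reverse_append]
        · rw [hmd]
          simp only [List.length_append, List.length_cons, List.length_nil]
          omega
    · have hall : (s ++ [c]).all (· = '9') = false := by
        simp [List.all_append, h9]
      constructor
      · intro h; rw [h] at hall; exact absurd hall (by simp)
      · intro _
        rw [hrev, carryRev]
        simp only [if_neg h9]
        have hdl := dval_le_eight hdc h9
        have hv : pvVal (s ++ [c]) + 1 = 10 * pvVal s + (pvDval c + 1) := by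
          rw [pvVal_concat]; omega
        constructor
        · by_cases hvs : 0 < pvVal s
          · obtain ⟨hcf, hle⟩ := pvCF hds hvs
            have hmd : myDigs (pvVal (s ++ [c]) + 1)
                = myDigs (pvVal s) ++ [Nat.digitChar (pvDval c + 1)] := by
              rw [hv, myDigs_step hvs (by omega)]
            rw [hmd]
            simp only [List.length_append, List.length_cons, List.length_nil]
            have harr : s.length + 1 - ((myDigs (pvVal s)).length + 1)
                = s.length - (myDigs (pvVal s)).length := by omega
            rw [harr]
            rw [chr_succ_digitChar hdc h9]
            conv_lhs => rw [hcf]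
            simp [List.reverse_append]
          · have hvs0 : pvVal s = 0 := by omega
            have hrep := pvVal_zero_all hds hvs0
            have hmd : myDigs (pvVal (s ++ [c]) + 1) = [Nat.digitChar (pvDval c + 1)] := by
              rw [hv, hvs0, Nat.mul_zero, Nat.zero_add, myDigs_small (by omega)]
            rw [hmd]
            simp only [List.length_append, List.length_cons, List.length_nil]
            rw [chr_succ_digitChar hdc h9]
            conv_lhs => rw [hrep]
            simp [List.reverse_append]
        · by_cases hvs : 0 < pvVal s
          · have hmd : myDigs (pvVal (s ++ [c]) + 1)
                = myDigs (pvVal s) ++ [Nat.digitChar (pvDval c + 1)] := by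
              rw [hv, myDigs_step hvs (by omega)]
            obtain ⟨_, hle⟩ := pvCF hds hvs
            rw [hmd]
            simp only [List.length_append, List.length_cons, List.length_nil]
            omega
          · have hvs0 : pvVal s = 0 := by omega
            have hmd : myDigs (pvVal (s ++ [c]) + 1) = [Nat.digitChar (pvDval c + 1)] := by
              rw [hv, hvs0, Nat.mul_zero, Nat.zero_add, myDigs_small (by omega)]
            rw [hmd]
            simp

lemma incB_nine {t : List Char} (hd : ∀ c ∈ t, pvDig c = true) (h9 : t.all (· = '9') = true) :
    incB t = (myDigs (pvVal t + 1), 1) := by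
  have h := (carryRev_spec hd).1 h9
  have hv : pvVal t = 10 ^ t.length - 1 := (pvAllNine_iff hd).mp h9
  have hp : (0:Nat) < 10 ^ t.length := Nat.pow_pos (by omega)
  rw [incB, h]
  simp only [if_pos rfl]
  rw [show pvVal t + 1 = 10 ^ t.length by omega, myDigs_pow]
  simp

lemma incB_not_nine {t : List Char} (hd : ∀ c ∈ t, pvDig c = true) (h9 : t.all (· = '9') = false) :
    incB t = (List.replicate (t.length - (myDigs (pvVal t + 1)).length) '0' ++ myDigs (pvVal t + 1), 0) ∧
    (myDigs (pvVal t + 1)).length ≤ t.length := by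
  obtain ⟨h, hle⟩ := (carryRev_spec hd).2 h9
  rw [incB, h]
  simp only [Bool.false_eq_true, if_neg]
  exact ⟨by simp, hle⟩

-- ---------- pyInt? on plain digit strings ----------
lemma pvDig_isDigit {c : Char} (h : pvDig c = true) : c.isDigit = true := by
  rcases pvDig_cases h with h'|h'|h'|h'|h'|h'|h'|h'|h'|h' <;> subst h' <;> decide

lemma pvDig_not_space {c : Char} (h : pvDig c = true) : pyIntSpace c = false := by
  rcases pvDig_cases h with h'|h'|h'|h'|h'|h'|h'|h'|h'|h' <;> subst h' <;> decide

lemma pyIntDigits_val {ds : List Char} (hd : ∀ c ∈ ds, pvDig c = true) (hne : ds ≠ []) :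
    ∀ b acc, pyIntDigits? ds b acc = some (ds.foldl (fun a c => 10 * a + pvDval c) acc) := by
  induction ds with
  | nil => exact absurd rfl hne
  | cons c rest ih =>
    intro b acc
    have hdc := hd c (by simp)
    simp only [pyIntDigits?, pvDig_isDigit hdc, if_pos]
    have hstep : acc * 10 + (c.toNat - '0'.toNat) = 10 * acc + pvDval c := by
      simp only [pvDval]
      have : '0'.toNat = 48 := rfl
      omega
    rw [hstep]
    cases hr : rest with
    | nil =>
      subst hr
      simp [pyIntDigits?]
    | cons d tail =>
      rw [← hr]
      have hne' : rest ≠ [] := by simp [hr]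
      rw [ih (fun x hx => hd x (by simp [hx])) hne' true (10 * acc + pvDval c)]
      simp

lemma pyInt_digits {ds : List Char} (hd : ∀ c ∈ ds, pvDig c = true) (hne : ds ≠ []) :
    pyInt? ds = some ((pvVal ds : Int)) := by
  have hdw : ds.dropWhile pyIntSpace = ds := by
    cases ds with
    | nil => rfl
    | cons c t => simp [List.dropWhile_cons, pvDig_not_space (hd c (by simp))]
  have hdw2 : ds.reverse.dropWhile pyIntSpace = ds.reverse := by
    cases hr : ds.reverse with
    | nil => rfl
    | cons c t =>
      have hc : c ∈ ds := by
        have : c ∈ ds.reverse := by simp [hr]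
        simpa using this
      simp [List.dropWhile_cons, pvDig_not_space (hd c hc)]
  rw [pyInt?]
  simp only [hdw, hdw2, List.reverse_reverse]
  cases ds with
  | nil => exact absurd rfl hne
  | cons c t =>
    have hdc := hd c (by simp)
    have hcm : c ≠ '-' := by rcases pvDig_cases hdc with h'|h'|h'|h'|h'|h'|h'|h'|h'|h' <;> subst h' <;> decide
    have hcp : c ≠ '+' := by rcases pvDig_cases hdc with h'|h'|h'|h'|h'|h'|h'|h'|h'|h' <;> subst h' <;> decide
    have hval := pyIntDigits_val hd hne false 0
    split
    · rename_i ds' heq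
      injection heq with h1 h2
      exact absurd h1 hcm
    · rename_i ds' heq
      injection heq with h1 h2
      exact absurd h1 hcp
    · rw [hval]
      simp [pvVal]

lemma pyInt_single {c : Char} (h : pvDig c = true) : pyInt? [c] = some ((pvDval c : Int)) := by
  rw [pyInt_digits (by simp [h]) (by simp)]
  simp [pvVal, pvDval]

-- ---------- the two extension loops agree, and their take is the cyclic closed form ----------
lemma extendLoopA_nil (n : Int) : ∀ k pF, extendLoopA [] n k pF = pF := by
  intro k pF
  cases k with
  | zero => rfl
  | succ k => simp [extendLoopA]

lemma extendA_nil (pF : List Char) (n : Int) : extendA pF [] n = pF :=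
  extendLoopA_nil n _ pF

lemma extendLoopB_eq_A (p : List Char) (n : Int) : ∀ k pF, extendLoopB p n k pF = extendLoopA p n k pF := by
  intro k
  induction k with
  | zero => intro pF; rfl
  | succ k ih =>
    intro pF
    rw [extendLoopB, extendLoopA]
    have hiff : ((pF.length : Int) < n + 1 ∧ p ≠ []) ↔ ((pF.length : Int) < n + 1 ∧ 0 < p.length) := by
      constructor
      · rintro ⟨h1, h2⟩; exact ⟨h1, List.length_pos_iff.mpr h2⟩
      · rintro ⟨h1, h2⟩; exact ⟨h1, List.length_pos_iff.mp h2⟩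
    by_cases h : ((pF.length : Int) < n + 1 ∧ 0 < p.length)
    · rw [if_pos (hiff.mpr h), if_pos h, ih]
    · rw [if_neg (fun hx => h (hiff.mp hx)), if_neg h]

lemma extendB_caller_eq (pF p : List Char) (n : Int) :
    (if p ≠ [] then extendB pF p n else pF) = extendA pF p n := by
  by_cases hp : p = []
  · simp [hp, extendA_nil]
  · simp only [hp, ne_eq, not_false_iff, if_pos]
    exact extendLoopB_eq_A p n _ pF

lemma extendLoopA_fuel (p : List Char) (n : Int) :
    ∀ k k' pF, (n + 1 - (pF.length : Int)).toNat ≤ k → (n + 1 - (pF.length : Int)).toNat ≤ k' →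
      extendLoopA p n k pF = extendLoopA p n k' pF := by
  intro k
  induction k with
  | zero =>
    intro k' pF hk hk'
    cases k' with
    | zero => rfl
    | succ k' =>
      rw [extendLoopA, extendLoopA]
      rw [if_neg]
      rintro ⟨h1, h2⟩
      omega
  | succ k ih =>
    intro k' pF hk hk'
    cases k' with
    | zero =>
      rw [extendLoopA, extendLoopA, if_neg]
      rintro ⟨h1, h2⟩
      omega
    | succ k' =>
      rw [extendLoopA, extendLoopA]
      by_cases h : ((pF.length : Int) < n + 1 ∧ 0 < p.length)
      · rw [if_pos h, if_pos h]
        apply ih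
        · simp only [List.length_append]
          omega
        · simp only [List.length_append]
          omega
      · rw [if_neg h, if_neg h]

lemma extendA_step (pF p : List Char) (n : Int)
    (h1 : (pF.length : Int) < n + 1) (h2 : p ≠ []) :
    extendA pF p n = extendA (pF ++ p) p n := by
  rw [extendA, extendA]
  have hk : (n + 1 - (pF.length : Int)).toNat = ((n + 1 - (pF.length : Int)).toNat - 1) + 1 := by
    omega
  rw [hk, extendLoopA]
  rw [if_pos ⟨h1, List.length_pos_iff.mpr h2⟩]
  apply extendLoopA_fuel
  · simp only [List.length_append]
    have := List.length_pos_iff.mpr h2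
    omega
  · omega

lemma extendA_done (pF p : List Char) (n : Int) (h : ¬ (pF.length : Int) < n + 1) :
    extendA pF p n = pF := by
  rw [extendA]
  have hk : (n + 1 - (pF.length : Int)).toNat = 0 := by omega
  rw [hk]
  rfl

lemma extendLoopA_ge (p : List Char) (n : Int) (hp : p ≠ []) :
    ∀ k pF, (n + 1 - (pF.length : Int)).toNat ≤ k → ¬ ((extendLoopA p n k pF).length : Int) < n + 1 := by
  intro k
  induction k with
  | zero =>
    intro pF hk
    rw [extendLoopA]
    omega
  | succ k ih =>
    intro pF hk
    rw [extendLoopA]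
    by_cases h : ((pF.length : Int) < n + 1 ∧ 0 < p.length)
    · rw [if_pos h]
      apply ih
      simp only [List.length_append]
      omega
    · rw [if_neg h]
      have := List.length_pos_iff.mpr hp
      intro hc
      exact h ⟨hc, this⟩

lemma extendA_ge (p : List Char) (n : Int) (hp : p ≠ []) (pF : List Char) :
    ¬ ((extendA pF p n).length : Int) < n + 1 :=
  extendLoopA_ge p n hp _ pF (le_refl _)

lemma flatten_replicate_comm (m : Nat) (p : List Char) :
    (List.replicate m p).flatten ++ p = p ++ (List.replicate m p).flatten := by
  have h1 : (List.replicate (m + 1) p).flatten = p ++ (List.replicate m p).flatten := by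
    rw [List.replicate_succ]; simp
  have h2 : (List.replicate (m + 1) p).flatten = (List.replicate m p).flatten ++ p := by
    rw [List.replicate_succ']; simp
  rw [← h1, h2]

lemma take_extendA (pF p : List Char) (n : Int) :
    (extendA pF p n).take (n + 1).toNat
      = (pF ++ (List.replicate (n + 1).toNat p).flatten).take (n + 1).toNat := by
  by_cases hp : p = []
  · subst hp
    rw [extendA_nil]
    simp
  · by_cases hdone : (pF.length : Int) < n + 1
    · rw [extendA_step pF p n hdone hp, take_extendA (pF ++ p) p n]
      have hsh : ((pF ++ p) ++ (List.replicate (n + 1).toNat p).flatten)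
          = (pF ++ (List.replicate (n + 1).toNat p).flatten) ++ p := by
        rw [List.append_assoc, List.append_assoc, ← flatten_replicate_comm]
      rw [hsh]
      rw [List.take_append_of_le_length]
      have hpl : 1 ≤ p.length := List.length_pos_iff.mpr hp
      have hflat : ((List.replicate (n + 1).toNat p).flatten).length = (n + 1).toNat * p.length := by
        simp [List.length_flatten]
      simp only [List.length_append, hflat]
      have := Nat.le_mul_of_pos_right (n + 1).toNat (show 0 < p.length by omega)
      omega
    · rw [extendA_done pF p n hdone]
      rw [List.take_append_of_le_length (by omega)]
  termination_by (n + 1 - (pF.length : Int)).toNat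
  decreasing_by
    have := List.length_pos_iff.mpr hp
    simp only [List.length_append]
    omega

lemma extendLoopA_all_dig {p : List Char} (n : Int) (h2 : ∀ c ∈ p, pvDig c = true) :
    ∀ k pF, (∀ c ∈ pF, pvDig c = true) → ∀ c ∈ extendLoopA p n k pF, pvDig c = true := by
  intro k
  induction k with
  | zero => intro pF h1; exact h1
  | succ k ih =>
    intro pF h1
    rw [extendLoopA]
    by_cases h : ((pF.length : Int) < n + 1 ∧ 0 < p.length)
    · rw [if_pos h]
      apply ih
      intro c hc
      rcases List.mem_append.mp hc with h'|h'
      exacts [h1 c h', h2 c h']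
    · rw [if_neg h]
      exact h1

-- ---------- the three parses agree ----------
lemma take1_iff (l : List Char) (c : Char) : l.take 1 = [c] ↔ l.head? = some c := by
  cases l <;> simp

lemma parseB_sgn (l : List Char) :
    (explose_dec l).1 = (if (parseB l).1 then (-1 : Int) else 1) := by
  rw [explose_dec, parseB]
  simp only [take1_iff]
  split_ifs <;> simp_all

lemma parseB_parts (l : List Char) :
    ((explose_dec l).2.1, (explose_dec l).2.2.1, (explose_dec l).2.2.2.1)
      = ((parseB l).2.1, (parseB l).2.2.1, (parseB l).2.2.2) := by
  rw [explose_dec, parseB]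
  simp only [take1_iff]
  split_ifs <;> simp_all

-- proof-side bridge: the contains/idxOf/slice reading of the stripped string, shown equal
-- to parseB's parts on every input and to the takeWhile shape (pvPE/pvFx/pvPer) on digit inputs
def prParse (r : List Char) : List Char × List Char × List Char :=
  if ¬ r.contains '.' then (r, [], [])
  else
    let pv := r.idxOf '.'
    let pE := r.take pv
    if ¬ r.contains '[' then (pE, r.drop (pv + 1), [])
    else
      let pf := r.idxOf '['
      (pE, PySem.List.slice r (some ((pv : Int) + 1)) (some (pf : Int)),
        PySem.List.slice r (some ((pf : Int) + 1)) (some (-1)))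

lemma pvBody_eq (l : List Char) :
    pvBody l = (if (if l.contains '~' then (l.drop 1, true) else (l, false)).1.head? = some '-'
      then (if l.contains '~' then (l.drop 1, true) else (l, false)).1.drop 1
      else (if l.contains '~' then (l.drop 1, true) else (l, false)).1) := by
  rw [pvBody]
  cases h0 : l.contains '~' <;>
    simp only [h0, Bool.false_eq_true, if_true, if_false, ite_true, ite_false, List.drop_one]

lemma prParse_parts (l : List Char) :
    prParse (pvBody l) = ((parseB l).2.1, (parseB l).2.2.1, (parseB l).2.2.2) := by
  rw [prParse, pvBody_eq, parseB]
  simp only [take1_iff]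
  split_ifs <;> simp_all

-- ---------- takeWhile shape facts ----------
lemma idxOf_eq_len_takeWhile (l : List Char) (c : Char) : l.idxOf c = (l.takeWhile (· ≠ c)).length := by
  induction l with
  | nil => rfl
  | cons a t ih =>
    by_cases h : a = c
    · subst h; simp
    · simp [List.idxOf_cons, h, ih]

lemma takeWhile_append_all {p : Char → Bool} {l₁ : List Char} (l₂ : List Char)
    (h : ∀ a ∈ l₁, p a = true) : (l₁ ++ l₂).takeWhile p = l₁ ++ l₂.takeWhile p := by
  induction l₁ with
  | nil => simp
  | cons a t ih =>
    simp [List.takeWhile_cons, h a (by simp), ih (fun x hx => h x (by simp [hx]))]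

lemma split_at_mem {l : List Char} {c : Char} (h : c ∈ l) :
    l = l.takeWhile (· ≠ c) ++ c :: (l.dropWhile (· ≠ c)).tail := by
  induction l with
  | nil => cases h
  | cons a t ih =>
    by_cases hac : a = c
    · subst hac; simp
    · have hmem : c ∈ t := by
        rcases List.mem_cons.mp h with h1 | h1
        · exact absurd h1.symm hac
        · exact h1
      have hpa : (decide (a ≠ c)) = true := by simp [hac]
      simp only [List.takeWhile_cons, List.dropWhile_cons, hpa, if_true, List.cons_append]
      exact congrArg (List.cons a) (ih hmem)

lemma dropWhile_head_eq {l : List Char} {c : Char} (h : l.dropWhile (· ≠ c) ≠ []) :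
    l.dropWhile (· ≠ c) = c :: (l.dropWhile (· ≠ c)).tail := by
  induction l with
  | nil => simp at h
  | cons a t ih =>
    by_cases hac : a = c
    · subst hac; simp
    · have hpa : (decide (a ≠ c)) = true := by simp [hac]
      simp only [List.dropWhile_cons, hpa, if_true] at h ⊢
      exact ih h

lemma slice_nat_neg_one (xs : List Char) (m : Nat) :
    PySem.List.slice xs (some (m : Int)) (some (-1)) = (xs.drop m).dropLast := by
  rw [PySem.List.slice]
  simp only [PySem.List.clampIdx_neg_one, PySem.List.clampIdx_natCast]
  have hdm : xs.drop (min m xs.length) = xs.drop m := by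
    rcases Nat.lt_or_ge xs.length m with h | h
    · rw [min_eq_right (by omega)]
      rw [List.drop_eq_nil_of_le (le_refl _), List.drop_eq_nil_of_le (by omega)]
    · rw [min_eq_left h]
  rw [hdm, List.dropLast_eq_take, List.length_drop]
  congr 1
  omega

lemma pvDig_ne_br {c : Char} (h : pvDig c = true) : c ≠ '[' := by
  rcases pvDig_cases h with h'|h'|h'|h'|h'|h'|h'|h'|h'|h' <;> subst h' <;> decide

lemma pvPer_of_tl_nil {r : List Char} (h : pvTl r = []) : pvPer r = [] := by
  have : pvPer r = (pvTl r).tail.dropLast := rfl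
  rw [this, h]
  rfl

lemma drop_idx_dot (r : List Char) (hmem : '.' ∈ r) :
    r.drop (r.idxOf '.' + 1) = pvRest r := by
  rw [idxOf_eq_len_takeWhile]
  have hsplit : r = pvPE r ++ '.' :: pvRest r := split_at_mem hmem
  have hgen : ∀ s : List Char, s = pvPE r ++ '.' :: pvRest r →
      s.drop ((r.takeWhile (· ≠ '.')).length + 1) = pvRest r := by
    intro s hs
    subst hs
    have := List.drop_length_add_append (l₁ := pvPE r) (l₂ := '.' :: pvRest r) 1
    simpa [pvPE] using this
  exact hgen r hsplit

lemma wf_parse {r : List Char} (hdot : r.contains '.' = true)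
    (hpe : ∀ c ∈ pvPE r, pvDig c = true) (hfx : ∀ c ∈ pvFx r, pvDig c = true) :
    prParse r = (pvPE r, pvFx r, pvPer r) := by
  have hmem : '.' ∈ r := List.contains_iff_mem.mp hdot
  have hsplit : r = pvPE r ++ '.' :: pvRest r := split_at_mem hmem
  have hidx : r.idxOf '.' = (pvPE r).length := idxOf_eq_len_takeWhile r '.'
  have hrest : pvFx r ++ pvTl r = pvRest r := List.takeWhile_append_dropWhile
  have htake : r.take (r.idxOf '.') = pvPE r := by
    rw [hidx]
    have hgen : ∀ s : List Char, s = pvPE r ++ '.' :: pvRest r →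
        s.take (pvPE r).length = pvPE r := by
      intro s hs
      subst hs
      exact List.take_left
    exact hgen r hsplit
  have hdrop : r.drop (r.idxOf '.' + 1) = pvRest r := drop_idx_dot r hmem
  by_cases htl : pvTl r = []
  · have hfxall : pvFx r = pvRest r := by rw [← hrest, htl, List.append_nil]
    have hnobr : r.contains '[' = false := by
      have hnm : '[' ∉ r := by
        intro hm
        rw [hsplit] at hm
        rcases List.mem_append.mp hm with hm1 | hm2
        · exact pvDig_ne_br (hpe _ hm1) rfl
        · rcases List.mem_cons.mp hm2 with hm3 | hm4
          · exact absurd hm3.symm (by decide)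
          · rw [← hfxall] at hm4
            exact pvDig_ne_br (hfx _ hm4) rfl
      cases hb : r.contains '[' with
      | false => rfl
      | true => exact absurd (List.contains_iff_mem.mp hb) hnm
    rw [prParse]
    rw [if_neg (show ¬ ¬ r.contains '.' = true by rw [hdot]; simp)]
    rw [if_pos (show ¬ r.contains '[' = true by rw [hnobr]; exact Bool.false_ne_true)]
    rw [htake, hdrop, hfxall, pvPer_of_tl_nil htl]
  · have hhd : pvTl r = '[' :: (pvTl r).tail := dropWhile_head_eq htl
    have hshape : r = (pvPE r ++ '.' :: pvFx r) ++ pvTl r := by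
      conv_lhs => rw [hsplit, ← hrest]
      simp
    have hbrm : '[' ∈ r := by
      rw [hshape.trans (congrArg ((pvPE r ++ '.' :: pvFx r) ++ ·) hhd)]
      simp
    have hbrcon : r.contains '[' = true := List.contains_iff_mem.mpr hbrm
    have hidxbr : r.idxOf '[' = (pvPE r).length + 1 + (pvFx r).length := by
      rw [idxOf_eq_len_takeWhile]
      have hgen : ∀ s : List Char, s = (pvPE r ++ '.' :: pvFx r) ++ pvTl r →
          (s.takeWhile (· ≠ '[')).length = (pvPE r).length + 1 + (pvFx r).length := by
        intro s hs
        subst hs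
        rw [takeWhile_append_all _ (by
          intro a ha
          rcases List.mem_append.mp ha with h1 | h2
          · simpa using pvDig_ne_br (hpe _ h1)
          · rcases List.mem_cons.mp h2 with h3 | h4
            · subst h3; decide
            · simpa using pvDig_ne_br (hfx _ h4))]
        rw [hhd]
        simp [List.takeWhile_cons]
        omega
      exact hgen r hshape
    rw [prParse]
    rw [if_neg (show ¬ ¬ r.contains '.' = true by rw [hdot]; simp)]
    rw [if_neg (show ¬ ¬ r.contains '[' = true by rw [hbrcon]; simp)]
    show (List.take (List.idxOf '.' r) r,
        PySem.List.slice r (some ((List.idxOf '.' r : Int) + 1)) (some ((List.idxOf '[' r : Int))),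
        PySem.List.slice r (some ((List.idxOf '[' r : Int) + 1)) (some (-1)))
      = (pvPE r, pvFx r, pvPer r)
    rw [htake]
    have hs1 : PySem.List.slice r (some ((r.idxOf '.' : Int) + 1)) (some ((r.idxOf '[' : Int)))
        = pvFx r := by
      have hc1 : ((r.idxOf '.' : Int) + 1) = (((r.idxOf '.' + 1 : Nat)) : Int) := by push_cast; ring
      rw [hc1, PySem.List.slice_natCast]
      rw [hdrop]
      rw [hidx, hidxbr, ← hrest]
      have : (pvPE r).length + 1 + (pvFx r).length - ((pvPE r).length + 1) = (pvFx r).length := by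
        omega
      rw [this]
      exact List.take_left
    have hs2 : PySem.List.slice r (some ((r.idxOf '[' : Int) + 1)) (some (-1)) = pvPer r := by
      have hc1 : ((r.idxOf '[' : Int) + 1) = (((r.idxOf '[' + 1 : Nat)) : Int) := by push_cast; ring
      rw [hc1, slice_nat_neg_one]
      have hshape2 : r = (pvPE r ++ '.' :: pvFx r) ++ '[' :: (pvTl r).tail :=
        hshape.trans (congrArg ((pvPE r ++ '.' :: pvFx r) ++ ·) hhd)
      have hdropbr : r.drop (r.idxOf '[' + 1) = (pvTl r).tail := by
        rw [hidxbr]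
        have hgen : ∀ s : List Char, s = (pvPE r ++ '.' :: pvFx r) ++ '[' :: (pvTl r).tail →
            s.drop ((pvPE r).length + 1 + (pvFx r).length + 1) = (pvTl r).tail := by
          intro s hs
          subst hs
          have h2 : ((pvPE r ++ '.' :: pvFx r) ++ '[' :: (pvTl r).tail).drop
              ((pvPE r ++ '.' :: pvFx r).length + 1) = ('[' :: (pvTl r).tail).drop 1 :=
            List.drop_length_add_append 1
          have h3 : (pvPE r ++ '.' :: pvFx r).length + 1 = (pvPE r).length + 1 + (pvFx r).length + 1 := by
            simp
            omega
          rw [h3] at h2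
          rw [h2]
          simp
        exact hgen r hshape2
      rw [hdropbr, pvPer]
    rw [hs1, hs2]

-- ---------- the two rounding branches agree ----------
lemma split_concat (X : List Char) (d : Char) (pv' : Nat) (h : pv' ≤ X.length) :
    (X ++ [d]).take pv' ++ '.' :: ((X ++ [d]).drop pv').dropLast
      = X.take pv' ++ '.' :: X.drop pv' := by
  rw [List.take_append_of_le_length h, List.drop_append_of_le_length h, List.dropLast_concat]

lemma char_lt5 {c : Char} (h : pvDig c = true) : (c < '5' ↔ pvDval c < 5) := by
  rcases pvDig_cases h with h'|h'|h'|h'|h'|h'|h'|h'|h'|h' <;> subst h' <;> simp <;> decide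

lemma char_ge5 {c : Char} (h : pvDig c = true) : ('5' ≤ c ↔ 5 ≤ pvDval c) := by
  rcases pvDig_cases h with h'|h'|h'|h'|h'|h'|h'|h'|h'|h' <;> subst h' <;> simp <;> decide

lemma all_nine_head_zero {t : List Char} (hne : t ≠ []) (hh : t.head? = some '0') :
    t.all (· = '9') = false := by
  cases t with
  | nil => exact absurd rfl hne
  | cons c t' =>
    simp only [List.head?_cons, Option.some.injEq] at hh
    subst hh
    simp

lemma main_round (digs : List Char) (pv : Nat)
    (hd : ∀ c ∈ digs, pvDig c = true)
    (c : Char) (hc : digs.getLast? = some c) (h53 : '5' ≤ c)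
    (hpv : pv + 1 ≤ digs.length)
    (hnD : ¬ ((digs.head? = some '0') ∧
      ((digs.dropLast.dropWhile (· = '0')).all (· = '9') = true))) :
    ((if (myDigs (pvVal digs)).length < digs.length then
        List.replicate (digs.length - (myDigs (pvVal digs)).length +
          (if (myDigs (pvVal digs)).length < (myDigs (pvVal digs + 5)).length then 1 else 0)) '0'
      else []) ++ myDigs (pvVal digs + 5) |>
      fun sn2 =>
      sn2.take (pv + (if (myDigs (pvVal digs)).length < (myDigs (pvVal digs + 5)).length then 1 else 0)) ++
        '.' :: (sn2.drop (pv + (if (myDigs (pvVal digs)).length < (myDigs (pvVal digs + 5)).length then 1 else 0))).dropLast)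
    = ((incB digs.dropLast).1.take (pv + (incB digs.dropLast).2) ++
        '.' :: (incB digs.dropLast).1.drop (pv + (incB digs.dropLast).2)) := by
  simp only []
  have hne : digs ≠ [] := by
    intro h
    rw [h] at hpv
    simp at hpv
  have hgl : digs.getLast hne = c := by
    have h1 := List.getLast?_eq_getLast (l := digs) hne
    rw [hc] at h1
    exact (Option.some.injEq _ _).mp h1.symm
  have hsplit : digs.dropLast ++ [c] = digs := by
    rw [← hgl]
    exact List.dropLast_concat_getLast hne
  set t := digs.dropLast with hT
  have hdt : ∀ d ∈ t, pvDig d = true := by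
    intro d hdm
    exact hd d (by rw [← hsplit]; exact List.mem_append.mpr (Or.inl hdm))
  have hdc : pvDig c = true := hd c (by rw [← hsplit]; simp)
  have hdv5 : 5 ≤ pvDval c := (char_ge5 hdc).mp h53
  have hdv9 : pvDval c < 10 := pvDig_dval_lt hdc
  have hvd : pvVal digs = 10 * pvVal t + pvDval c := by rw [← hsplit, pvVal_concat]
  have hv5 : pvVal digs + 5 = 10 * (pvVal t + 1) + (pvDval c - 5) := by omega
  have hmd5 : myDigs (pvVal digs + 5)
      = myDigs (pvVal t + 1) ++ [Nat.digitChar (pvDval c - 5)] := by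
    rw [hv5, myDigs_step (by omega) (by omega)]
  have hlen : digs.length = t.length + 1 := by rw [← hsplit]; simp
  have hpvt : pv ≤ t.length := by omega
  by_cases ht0 : t = []
  · have hvt : pvVal t = 0 := by rw [ht0]; rfl
    have hpv0 : pv = 0 := by
      rw [hlen, ht0] at hpv
      simp at hpv
      omega
    have hv : pvVal digs = pvDval c := by omega
    have hnc1 : (myDigs (pvVal digs)).length = 1 := by
      rw [hv, myDigs_small (by omega)]
      rfl
    have hi1 : (if (myDigs (pvVal digs)).length < (myDigs (pvVal digs + 5)).length then 1 else 0) = 1 := by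
      apply if_pos
      rw [hnc1, hmd5, ht0, List.length_append]
      have h1 : pvVal ([] : List Char) + 1 = 1 := rfl
      rw [h1, myDigs_small (by omega)]
      simp
    have hbz : (if (myDigs (pvVal digs)).length < digs.length then
        List.replicate (digs.length - (myDigs (pvVal digs)).length +
          (if (myDigs (pvVal digs)).length < (myDigs (pvVal digs + 5)).length then 1 else 0)) '0'
      else []) = [] := by
      apply if_neg
      rw [hnc1, hlen, ht0]
      simp
    rw [hbz, hi1, hmd5, hpv0, ht0]
    have h1 : pvVal ([] : List Char) + 1 = 1 := rfl
    rw [h1, myDigs_small (by omega)]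
    have h2 : Nat.digitChar 1 = '1' := rfl
    rw [h2]
    show ['1', Nat.digitChar (pvDval c - 5)].take 1 ++
        '.' :: (['1', Nat.digitChar (pvDval c - 5)].drop 1).dropLast = _
    have hincnil : incB ([] : List Char) = (['1'], 1) := by
      simp [incB, carryRev]
    rw [hincnil]
    rfl
  · have hheadt : digs.head? = t.head? := by
      rw [← hsplit]
      exact (List.head?_append_of_ne_nil _ ht0)
    by_cases hvt0 : pvVal t = 0
    · exfalso
      have hrep := pvVal_zero_all hdt hvt0
      have hh0 : t.head? = some '0' := by
        conv_lhs => rw [hrep]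
        cases hx : t.length with
        | zero => exact absurd (List.eq_nil_of_length_eq_zero hx) ht0
        | succ k => simp [List.replicate_succ]
      have hdw : t.dropWhile (· = '0') = [] := by
        conv_lhs => rw [hrep]
        have := dropWhile0_rep t.length ([] : List Char)
        simpa using this
      apply hnD
      refine ⟨by rw [hheadt]; exact hh0, ?_⟩
      rw [hdw]
      rfl
    · have hvtpos : 0 < pvVal t := by omega
      have hnc1 : (myDigs (pvVal digs)).length = (myDigs (pvVal t)).length + 1 := by
        rw [hvd, myDigs_step hvtpos (by omega), List.length_append]
        rfl
      have hnc2 : (myDigs (pvVal digs + 5)).length = (myDigs (pvVal t + 1)).length + 1 := by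
        rw [hmd5, List.length_append]
        rfl
      have hLsucc := myDigs_len_succ (pvVal t)
      obtain ⟨hcf, hMle⟩ := pvCF hdt hvtpos
      by_cases hh : digs.head? = some '0'
      · have hh9 : (t.dropWhile (· = '0')).all (· = '9') = false := by
          cases hx : (t.dropWhile (· = '0')).all (· = '9') with
          | false => rfl
          | true => exact absurd ⟨hh, hx⟩ hnD
        have hdwt : t.dropWhile (· = '0') = myDigs (pvVal t) := dropWhile0_eq_myDigs hdt hvtpos
        have hne10 : pvVal t + 1 ≠ 10 ^ (myDigs (pvVal t)).length := by
          intro hx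
          have h9 : (myDigs (pvVal t)).all (· = '9') = true := by
            rw [pvAllNine_iff (myDigs_all_dig _), myDigs_val]
            omega
          rw [hdwt, h9] at hh9
          exact Bool.noConfusion hh9
        have hLM : (myDigs (pvVal t + 1)).length = (myDigs (pvVal t)).length := by
          rcases hLsucc with ⟨h1, _⟩ | ⟨h1, _⟩
          · exact h1
          · exact absurd h1 hne10
        have hMlt : (myDigs (pvVal t)).length < t.length := by
          rcases Nat.lt_or_ge (myDigs (pvVal t)).length t.length with h | h
          · exact h
          · have hMeq : (myDigs (pvVal t)).length = t.length := by omega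
            have hx : t.head? = (myDigs (pvVal t)).head? := by
              conv_lhs => rw [hcf]
              rw [hMeq, Nat.sub_self]
              rfl
            rw [hheadt, hx] at hh
            exact absurd hh (myDigs_head_ne_zero hvtpos)
        have hi0 : (if (myDigs (pvVal digs)).length < (myDigs (pvVal digs + 5)).length then 1 else 0) = 0 := by
          apply if_neg
          rw [hnc1, hnc2]
          omega
        have hbz : (if (myDigs (pvVal digs)).length < digs.length then
            List.replicate (digs.length - (myDigs (pvVal digs)).length +
              (if (myDigs (pvVal digs)).length < (myDigs (pvVal digs + 5)).length then 1 else 0)) '0'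
          else []) = List.replicate (t.length - (myDigs (pvVal t + 1)).length) '0' := by
          rw [if_pos (by rw [hnc1]; omega), hi0, hnc1, hlen, hLM]
          congr 1
          omega
        have ht9 : t.all (· = '9') = false := all_nine_head_zero ht0 (by rw [← hheadt]; exact hh)
        obtain ⟨hinc, hincle⟩ := incB_not_nine hdt ht9
        rw [hbz, hi0, hmd5, hinc]
        simp only [Nat.add_zero]
        rw [← List.append_assoc]
        exact split_concat _ _ _ (by
          simp only [List.length_append, List.length_replicate]
          omega)
      · have hMeq : (myDigs (pvVal t)).length = t.length := by
          rcases Nat.lt_or_ge (myDigs (pvVal t)).length t.length with h | h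
          · exfalso
            have hx : t.head? = some '0' := by
              conv_lhs => rw [hcf]
              cases hy : (t.length - (myDigs (pvVal t)).length) with
              | zero => omega
              | succ k => simp [List.replicate_succ]
            rw [hheadt] at hh
            exact hh hx
          · omega
        have hbz : (if (myDigs (pvVal digs)).length < digs.length then
            List.replicate (digs.length - (myDigs (pvVal digs)).length +
              (if (myDigs (pvVal digs)).length < (myDigs (pvVal digs + 5)).length then 1 else 0)) '0'
          else []) = [] := by
          apply if_neg
          rw [hnc1, hlen]
          omega
        rw [hbz, List.nil_append]
        by_cases h9 : t.all (· = '9') = true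
        · have hv10 : pvVal t = 10 ^ t.length - 1 := (pvAllNine_iff hdt).mp h9
          have h10pos : (0:Nat) < 10 ^ t.length := Nat.pow_pos (by omega)
          have hsucc10 : pvVal t + 1 = 10 ^ (myDigs (pvVal t)).length := by
            rw [hMeq]
            omega
          have hLM : (myDigs (pvVal t + 1)).length = (myDigs (pvVal t)).length + 1 := by
            rcases hLsucc with ⟨_, h2⟩ | ⟨_, h2⟩
            · exact absurd hsucc10 h2
            · exact h2
          have hi1 : (if (myDigs (pvVal digs)).length < (myDigs (pvVal digs + 5)).length then 1 else 0) = 1 := by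
            apply if_pos
            rw [hnc1, hnc2]
            omega
          rw [hi1, hmd5, incB_nine hdt h9]
          exact split_concat _ _ _ (by rw [hLM, hMeq]; omega)
        · have h9f : t.all (· = '9') = false := by
            cases hx : t.all (· = '9') with
            | false => rfl
            | true => exact absurd hx h9
          have hne10 : pvVal t + 1 ≠ 10 ^ (myDigs (pvVal t)).length := by
            intro hx
            have h10pos : (0:Nat) < 10 ^ t.length := Nat.pow_pos (by omega)
            have h9t : t.all (· = '9') = true := by
              rw [pvAllNine_iff hdt]
              rw [hMeq] at hx
              omega
            rw [h9t] at h9f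
            exact Bool.noConfusion h9f
          have hLM : (myDigs (pvVal t + 1)).length = (myDigs (pvVal t)).length := by
            rcases hLsucc with ⟨h1, _⟩ | ⟨h1, _⟩
            · exact h1
            · exact absurd h1 hne10
          have hi0 : (if (myDigs (pvVal digs)).length < (myDigs (pvVal digs + 5)).length then 1 else 0) = 0 := by
            apply if_neg
            rw [hnc1, hnc2]
            omega
          obtain ⟨hinc, hincle⟩ := incB_not_nine hdt h9f
          have hrep0 : t.length - (myDigs (pvVal t + 1)).length = 0 := by
            rw [hLM, hMeq]
            omega
          rw [hi0, hmd5, hinc, hrep0]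
          simp only [List.replicate_zero, List.nil_append, Nat.add_zero]
          exact split_concat _ _ _ (by rw [hLM, hMeq]; omega)

-- ---------- assembling the ports ----------
lemma sgn_if {α : Type} (b : Bool) (X Y : α) :
    (if (if b then (-1 : Int) else 1) = -1 then X else Y) = if b then X else Y := by
  cases b <;> simp

lemma pyGet_neg_one {l : List Char} (h : l ≠ []) :
    PySem.List.pyGet? l (-1) = l.getLast? := by
  rw [PySem.List.pyGet?_neg_ofNat l 1 (by omega) (by
    have := List.length_pos_iff.mpr h
    omega)]
  rw [List.getLast?_eq_getElem?]

lemma app_congr {l a b : List Char} (h : a = b) : l ++ a = l ++ b := by rw [h]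

set_option maxHeartbeats 2000000 in
lemma claim_unchanged_main (sd : String) (n : Int) (hPre : Pre_arrondi sd n)
    (hnD : ¬ D_arrondi sd n) : arrondi sd n = arrondi_alt sd n := by
  obtain ⟨hn, hst, hC⟩ := hPre
  have hparts := parseB_parts sd.toList
  have hE1 : (explose_dec sd.toList).2.1 = (parseB sd.toList).2.1 :=
    congrArg (fun q => q.1) hparts
  have hE2 : (explose_dec sd.toList).2.2.1 = (parseB sd.toList).2.2.1 :=
    congrArg (fun q => q.2.1) hparts
  have hE3 : (explose_dec sd.toList).2.2.2.1 = (parseB sd.toList).2.2.2 :=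
    congrArg (fun q => q.2.2) hparts
  have hSgn := parseB_sgn sd.toList
  have hPP := prParse_parts sd.toList
  have hB1 : (parseB sd.toList).2.1 = (prParse (pvBody sd.toList)).1 := by rw [hPP]
  have hB2 : (parseB sd.toList).2.2.1 = (prParse (pvBody sd.toList)).2.1 := by rw [hPP]
  have hB3 : (parseB sd.toList).2.2.2 = (prParse (pvBody sd.toList)).2.2 := by rw [hPP]
  rw [arrondi, arrondi_alt]
  simp only [hE1, hE2, hE3, hSgn, extendB_caller_eq, sgn_if]
  by_cases hearly : ((extendA (parseB sd.toList).2.2.1 (parseB sd.toList).2.2.2 n).length : Int) < n + 1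
  · rw [if_pos hearly, if_pos hearly]
  · rw [if_neg hearly, if_neg hearly]
    -- ¬early rules out the dot-free and short-fixed cases of Pre_: the input is well-formed
    have hCm : (pvBody sd.toList).contains '.' = true ∧
        (pvPE (pvBody sd.toList) ++ pvFx (pvBody sd.toList) ++ pvPer (pvBody sd.toList)).all
          pvDig = true := by
      rcases hC with hC0 | ⟨hC2a0, hC2b0⟩ | hC3
      case inl =>
        have hC1 : (pvBody sd.toList).contains '.' = false := hC0
        exfalso
        apply hearly
        have hp : prParse (pvBody sd.toList) = (pvBody sd.toList, [], []) := by
          rw [prParse]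
          rw [if_pos (show ¬ (pvBody sd.toList).contains '.' = true by rw [hC1]; exact Bool.false_ne_true)]
        rw [hB2, hB3, hp, extendA_nil]
        simp only [List.length_nil, Nat.cast_zero]
        omega
      case inr.inl =>
        have hC2a : (pvBody sd.toList).contains '[' = false := hC2a0
        have hC2b : ((pvRest (pvBody sd.toList)).length : Int) < n + 1 := hC2b0
        exfalso
        apply hearly
        by_cases hdot : (pvBody sd.toList).contains '.' = true
        · have hmem : '.' ∈ pvBody sd.toList := List.contains_iff_mem.mp hdot
          have hp : prParse (pvBody sd.toList)
              = ((pvBody sd.toList).take ((pvBody sd.toList).idxOf '.'),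
                  pvRest (pvBody sd.toList), []) := by
            rw [prParse]
            rw [if_neg (show ¬ ¬ (pvBody sd.toList).contains '.' = true by rw [hdot]; simp)]
            rw [if_pos (show ¬ (pvBody sd.toList).contains '[' = true by rw [hC2a]; exact Bool.false_ne_true)]
            rw [drop_idx_dot _ hmem]
          rw [hB2, hB3, hp, extendA_nil]
          exact hC2b
        · have hC1 : (pvBody sd.toList).contains '.' = false := by
            cases hx : (pvBody sd.toList).contains '.' with
            | false => rfl
            | true => exact absurd hx hdot
          have hp : prParse (pvBody sd.toList) = (pvBody sd.toList, [], []) := by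
            rw [prParse]
            rw [if_pos (show ¬ (pvBody sd.toList).contains '.' = true by rw [hC1]; exact Bool.false_ne_true)]
          rw [hB2, hB3, hp, extendA_nil]
          simp only [List.length_nil, Nat.cast_zero]
          omega
      case inr.inr => exact ⟨hC3.1, hC3.2⟩
    obtain ⟨hdot, hall⟩ := hCm
    have hallm := hall
    simp only [List.all_append, Bool.and_eq_true, List.all_eq_true] at hallm
    obtain ⟨⟨hpedig, hfxdig⟩, hperdig⟩ := hallm
    have hp := wf_parse hdot hpedig hfxdig
    have hF1 : (parseB sd.toList).2.1 = pvPE (pvBody sd.toList) := by rw [hB1, hp]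
    have hF2 : (parseB sd.toList).2.2.1 = pvFx (pvBody sd.toList) := by rw [hB2, hp]
    have hF3 : (parseB sd.toList).2.2.2 = pvPer (pvBody sd.toList) := by rw [hB3, hp]
    simp only [hF1, hF2, hF3] at hearly ⊢
    have hslice : PySem.List.slice
        (extendA (pvFx (pvBody sd.toList)) (pvPer (pvBody sd.toList)) n) none (some (n + 1))
        = (extendA (pvFx (pvBody sd.toList)) (pvPer (pvBody sd.toList)) n).take (n + 1).toNat :=
      PySem.List.slice_to _ (by omega)
    have hdigseq : pvPE (pvBody sd.toList) ++ PySem.List.slice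
        (extendA (pvFx (pvBody sd.toList)) (pvPer (pvBody sd.toList)) n) none (some (n + 1))
        = pvDigs (pvBody sd.toList) n := by
      rw [hslice, take_extendA, pvDigs]
    have hdigAll : ∀ d ∈ pvPE (pvBody sd.toList) ++ PySem.List.slice
        (extendA (pvFx (pvBody sd.toList)) (pvPer (pvBody sd.toList)) n) none (some (n + 1)),
        pvDig d = true := by
      intro d hdm
      rcases List.mem_append.mp hdm with hm | hm
      · exact hpedig d hm
      · rw [hslice] at hm
        have hm2 := List.mem_of_mem_take hm
        refine extendLoopA_all_dig n ?_ _ _ hfxdig d hm2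
        exact hperdig
    have hdigsne : pvPE (pvBody sd.toList) ++ PySem.List.slice
        (extendA (pvFx (pvBody sd.toList)) (pvPer (pvBody sd.toList)) n) none (some (n + 1)) ≠ [] := by
      rw [hslice]
      intro hx
      rcases List.append_eq_nil_iff.mp hx with ⟨_, h2⟩
      have h3 := congrArg List.length h2
      rw [List.length_take] at h3
      simp only [List.length_nil] at h3
      omega
    obtain ⟨c₀, hgl⟩ : ∃ c₀, (pvPE (pvBody sd.toList) ++ PySem.List.slice
        (extendA (pvFx (pvBody sd.toList)) (pvPer (pvBody sd.toList)) n) none (some (n + 1))).getLast?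
        = some c₀ := by
      cases hx : (pvPE (pvBody sd.toList) ++ PySem.List.slice
          (extendA (pvFx (pvBody sd.toList)) (pvPer (pvBody sd.toList)) n) none (some (n + 1))).getLast? with
      | none => exact absurd (List.getLast?_eq_none_iff.mp hx) hdigsne
      | some c₀ => exact ⟨c₀, rfl⟩
    have hdc₀ : pvDig c₀ = true := hdigAll c₀ (List.mem_of_getLast? hgl)
    have hlast : PySem.List.pyGet? (pvPE (pvBody sd.toList) ++ PySem.List.slice
        (extendA (pvFx (pvBody sd.toList)) (pvPer (pvBody sd.toList)) n) none (some (n + 1))) (-1)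
        = some c₀ := by
      rw [pyGet_neg_one hdigsne]
      exact hgl
    simp only [hlast]
    by_cases hlt : c₀ < '5'
    · rw [pyInt_single hdc₀]
      have hnot5 : ¬ (5 ≤ ((pvDval c₀ : Nat) : Int)) := by
        have := (char_lt5 hdc₀).mp hlt
        omega
      simp only [if_neg hnot5, if_pos hlt]
    · have h53 : '5' ≤ c₀ := not_lt.mp hlt
      have havail : (n + 1 : Int) ≤ ((pvFx (pvBody sd.toList)).length : Int) ∨
          pvPer (pvBody sd.toList) ≠ [] := by
        by_cases hper : pvPer (pvBody sd.toList) = []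
        · left
          rw [hper, extendA_nil] at hearly
          omega
        · right
          exact hper
      rw [pyInt_digits hdigAll hdigsne, pyInt_single hdc₀]
      have h5i : (5 : Int) ≤ ((pvDval c₀ : Nat) : Int) := by
        have := (char_ge5 hdc₀).mp h53
        omega
      simp only [if_pos h5i, if_neg hlt]
      have htc1 : PySem.Int.toChars ((pvVal (pvPE (pvBody sd.toList) ++ PySem.List.slice
          (extendA (pvFx (pvBody sd.toList)) (pvPer (pvBody sd.toList)) n) none (some (n + 1))) : Nat) : Int)
          = myDigs (pvVal (pvPE (pvBody sd.toList) ++ PySem.List.slice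
          (extendA (pvFx (pvBody sd.toList)) (pvPer (pvBody sd.toList)) n) none (some (n + 1)))) := by
        rw [toChars_nonneg (Int.natCast_nonneg _), Int.toNat_natCast]
      have htc2 : PySem.Int.toChars (((pvVal (pvPE (pvBody sd.toList) ++ PySem.List.slice
          (extendA (pvFx (pvBody sd.toList)) (pvPer (pvBody sd.toList)) n) none (some (n + 1))) : Nat) : Int) + 5)
          = myDigs (pvVal (pvPE (pvBody sd.toList) ++ PySem.List.slice
          (extendA (pvFx (pvBody sd.toList)) (pvPer (pvBody sd.toList)) n) none (some (n + 1))) + 5) := by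
        have hcast : (((pvVal (pvPE (pvBody sd.toList) ++ PySem.List.slice
            (extendA (pvFx (pvBody sd.toList)) (pvPer (pvBody sd.toList)) n) none (some (n + 1))) : Nat) : Int) + 5)
            = (((pvVal (pvPE (pvBody sd.toList) ++ PySem.List.slice
            (extendA (pvFx (pvBody sd.toList)) (pvPer (pvBody sd.toList)) n) none (some (n + 1))) + 5 : Nat) : Int)) := by
          push_cast
          ring
        rw [hcast, toChars_nonneg (Int.natCast_nonneg _), Int.toNat_natCast]
      simp only [htc1, htc2]
      apply congrArg String.ofList
      simp only [List.append_assoc]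
      apply app_congr
      have hnD' : ¬ (((pvPE (pvBody sd.toList) ++ PySem.List.slice
          (extendA (pvFx (pvBody sd.toList)) (pvPer (pvBody sd.toList)) n) none (some (n + 1))).head? = some '0') ∧
          (((pvPE (pvBody sd.toList) ++ PySem.List.slice
          (extendA (pvFx (pvBody sd.toList)) (pvPer (pvBody sd.toList)) n) none (some (n + 1))).dropLast.dropWhile (· = '0')).all (· = '9') = true)) := by
        intro ⟨hh, h9⟩
        apply hnD
        have hglD : (pvDigs (pvBody sd.toList) n).getLast? = some c₀ := by
          rw [← hdigseq]
          exact hgl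
        refine ⟨hn, hst, hdot, hall, havail, ?_, ?_, ?_⟩
        · show (pvDigs (pvBody sd.toList) n).head? = some '0'
          rw [← hdigseq]
          exact hh
        · show (pvDigs (pvBody sd.toList) n).getLast?.any (fun c => decide ('5' ≤ c)) = true
          rw [hglD]
          simp [Option.any, h53]
        · show ((pvDigs (pvBody sd.toList) n).dropLast.dropWhile (· = '0')).all (· = '9') = true
          rw [← hdigseq]
          exact h9
      have hlenpv : (pvPE (pvBody sd.toList)).length + 1 ≤ (pvPE (pvBody sd.toList) ++ PySem.List.slice
          (extendA (pvFx (pvBody sd.toList)) (pvPer (pvBody sd.toList)) n) none (some (n + 1))).length := by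
        rw [hslice]
        simp only [List.length_append, List.length_take]
        omega
      have := main_round (pvPE (pvBody sd.toList) ++ PySem.List.slice
          (extendA (pvFx (pvBody sd.toList)) (pvPer (pvBody sd.toList)) n) none (some (n + 1)))
          ((pvPE (pvBody sd.toList)).length) hdigAll c₀ hgl h53 hlenpv hnD'
      simpa [List.append_assoc] using this


-- ---------- the tight claim: inside D_ the two outputs always differ (by length) ----------

-- the two rounding branches as standalone list functions of the digit string and point position
def aRound (D : List Char) (pv : Nat) : List Char :=
  (if (myDigs (pvVal D)).length < D.length then
      List.replicate (D.length - (myDigs (pvVal D)).length +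
        (if (myDigs (pvVal D)).length < (myDigs (pvVal D + 5)).length then 1 else 0)) '0'
    else []) ++ myDigs (pvVal D + 5) |>
    (fun sn2 => sn2.take (pv + (if (myDigs (pvVal D)).length < (myDigs (pvVal D + 5)).length then 1 else 0)) ++
      '.' :: (sn2.drop (pv + (if (myDigs (pvVal D)).length < (myDigs (pvVal D + 5)).length then 1 else 0))).dropLast)

def bRound (D : List Char) (pv : Nat) : List Char :=
  (incB D.dropLast).1.take (pv + (incB D.dropLast).2) ++
    '.' :: (incB D.dropLast).1.drop (pv + (incB D.dropLast).2)

lemma myDigs_len_eq {v k : Nat} (h1 : 10 ^ k ≤ v) (h2 : v < 10 ^ (k + 1)) :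
    (myDigs v).length = k + 1 := by
  have hle := myDigs_len_le (k := k + 1) (by omega) h2
  have hlt := myDigs_lt v
  by_contra hne
  have hlen : (myDigs v).length ≤ k := by omega
  have : (10:Nat) ^ (myDigs v).length ≤ 10 ^ k := Nat.pow_le_pow_right (by omega) hlen
  omega

lemma pvVal_rep_zero (k : Nat) : pvVal (List.replicate k '0') = 0 := by
  induction k with
  | zero => rfl
  | succ k ih =>
    rw [List.replicate_succ, pvVal_cons, ih]
    have : pvDval '0' = 0 := rfl
    rw [this]
    simp

lemma tight_len (D : List Char) (pv : Nat)
    (hd : ∀ c ∈ D, pvDig c = true)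
    (c₀ : Char) (hc : D.getLast? = some c₀) (h53 : '5' ≤ c₀)
    (hpv : pv + 1 ≤ D.length)
    (hh : D.head? = some '0')
    (h9 : (D.dropLast.dropWhile (· = '0')).all (· = '9') = true) :
    (aRound D pv).length = D.length + 2 ∧ (bRound D pv).length = D.length := by
  have hne : D ≠ [] := by
    intro h
    rw [h] at hc
    simp at hc
  have hgl : D.getLast hne = c₀ := by
    have h1 := List.getLast?_eq_getLast (l := D) hne
    rw [hc] at h1
    exact (Option.some.injEq _ _).mp h1.symm
  have hsplit : D.dropLast ++ [c₀] = D := by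
    rw [← hgl]
    exact List.dropLast_concat_getLast hne
  have hdt : ∀ d ∈ D.dropLast, pvDig d = true := by
    intro d hdm
    exact hd d (by rw [← hsplit]; exact List.mem_append.mpr (Or.inl hdm))
  have hdc : pvDig c₀ = true := hd c₀ (by rw [← hsplit]; simp)
  have hdv5 : 5 ≤ pvDval c₀ := (char_ge5 hdc).mp h53
  have hdv9 : pvDval c₀ < 10 := pvDig_dval_lt hdc
  have ht0 : D.dropLast ≠ [] := by
    intro h
    have hD1 : D = [c₀] := by rw [← hsplit, h]; rfl
    rw [hD1] at hh
    simp at hh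
    subst hh
    exact absurd h53 (by decide)
  have hheadt : D.dropLast.head? = some '0' := by
    have h1 : D.head? = D.dropLast.head? := by
      conv_lhs => rw [← hsplit]
      exact List.head?_append_of_ne_nil _ ht0
    rw [← h1]
    exact hh
  have hzw : D.dropLast.takeWhile (· = '0') ++ D.dropLast.dropWhile (· = '0') = D.dropLast :=
    List.takeWhile_append_dropWhile
  have hzrep : D.dropLast.takeWhile (· = '0')
      = List.replicate (D.dropLast.takeWhile (· = '0')).length '0' :=
    List.eq_replicate_of_mem (fun x hx => by simpa using List.mem_takeWhile_imp hx)
  have ha1 : 1 ≤ (D.dropLast.takeWhile (· = '0')).length := by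
    by_contra hcon
    have hz0 : D.dropLast.takeWhile (· = '0') = [] := by
      cases hx : D.dropLast.takeWhile (· = '0') with
      | nil => rfl
      | cons a t => rw [hx] at hcon; simp at hcon
    have hwt : D.dropLast.dropWhile (· = '0') = D.dropLast := by
      have h1 := hzw
      rw [hz0] at h1
      simpa using h1
    cases hx : D.dropLast with
    | nil => exact ht0 hx
    | cons x xs =>
      rw [hx] at hheadt
      simp only [List.head?_cons, Option.some.injEq] at hheadt
      rw [hwt, hx] at h9
      simp only [List.all_cons, Bool.and_eq_true, decide_eq_true_eq] at h9
      rw [hheadt] at h9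
      exact absurd h9.1 (by decide)
  have hwd : ∀ d ∈ D.dropLast.dropWhile (· = '0'), pvDig d = true := by
    intro d hdm
    exact hdt d ((List.dropWhile_sublist _).mem hdm)
  have hval_t : pvVal D.dropLast = 10 ^ (D.dropLast.dropWhile (· = '0')).length - 1 := by
    have h1 : pvVal (D.dropLast.takeWhile (· = '0') ++ D.dropLast.dropWhile (· = '0'))
        = 10 ^ (D.dropLast.dropWhile (· = '0')).length - 1 := by
      rw [pvVal_append]
      conv_lhs => rw [hzrep]
      rw [pvVal_rep_zero, (pvAllNine_iff hwd).mp h9]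
      simp
    rw [hzw] at h1
    exact h1
  have hpow : (1:Nat) ≤ 10 ^ (D.dropLast.dropWhile (· = '0')).length := Nat.one_le_pow _ _ (by omega)
  have hV : pvVal D = 10 * (10 ^ (D.dropLast.dropWhile (· = '0')).length - 1) + pvDval c₀ := by
    rw [← hsplit, pvVal_concat, hval_t, hsplit]
  have hlow : 10 ^ (D.dropLast.dropWhile (· = '0')).length ≤ pvVal D := by
    rcases Nat.eq_zero_or_pos (D.dropLast.dropWhile (· = '0')).length with hb0 | hb1
    · rw [hb0] at hV ⊢
      simp only [pow_zero] at hV ⊢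
      omega
    · have h10 : 10 ≤ 10 ^ (D.dropLast.dropWhile (· = '0')).length := by
        calc (10:Nat) = 10 ^ 1 := (pow_one 10).symm
        _ ≤ _ := Nat.pow_le_pow_right (by omega) hb1
      omega
  have hps : (10:Nat) ^ ((D.dropLast.dropWhile (· = '0')).length + 1)
      = 10 * 10 ^ (D.dropLast.dropWhile (· = '0')).length := by ring
  have hup : pvVal D < 10 ^ ((D.dropLast.dropWhile (· = '0')).length + 1) := by
    rw [hps]
    omega
  have hnc1 : (myDigs (pvVal D)).length = (D.dropLast.dropWhile (· = '0')).length + 1 :=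
    myDigs_len_eq hlow hup
  have hps2 : (10:Nat) ^ ((D.dropLast.dropWhile (· = '0')).length + 2)
      = 10 * 10 ^ ((D.dropLast.dropWhile (· = '0')).length + 1) := by ring
  have hlow5 : 10 ^ ((D.dropLast.dropWhile (· = '0')).length + 1) ≤ pvVal D + 5 := by
    rw [hps]
    omega
  have hup5 : pvVal D + 5 < 10 ^ ((D.dropLast.dropWhile (· = '0')).length + 2) := by
    rw [hps2, hps]
    omega
  have hnc2 : (myDigs (pvVal D + 5)).length = (D.dropLast.dropWhile (· = '0')).length + 2 :=
    myDigs_len_eq hlow5 hup5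
  have hlenD : D.length = (D.dropLast.takeWhile (· = '0')).length
      + (D.dropLast.dropWhile (· = '0')).length + 1 := by
    have h1 := congrArg List.length hsplit
    have h2 := congrArg List.length hzw
    simp only [List.length_append, List.length_cons, List.length_nil] at h1 h2
    omega
  have hi : (if (myDigs (pvVal D)).length < (myDigs (pvVal D + 5)).length then 1 else 0) = 1 := by
    apply if_pos
    rw [hnc1, hnc2]
    omega
  have hbzc : (myDigs (pvVal D)).length < D.length := by
    rw [hnc1, hlenD]
    omega
  constructor
  · simp only [aRound, hi]
    rw [if_pos hbzc]
    simp only [List.length_append, List.length_take, List.length_cons, List.length_dropLast,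
      List.length_drop, List.length_replicate]
    rw [hnc1, hnc2] at *
    omega
  · have ht9 : D.dropLast.all (· = '9') = false := all_nine_head_zero ht0 hheadt
    obtain ⟨hinc, hincle⟩ := incB_not_nine hdt ht9
    simp only [bRound, hinc]
    simp only [List.length_append, List.length_take, List.length_cons, List.length_drop,
      List.length_replicate]
    have hlt : D.dropLast.length = D.length - 1 := by
      rw [List.length_dropLast]
    rw [hlt] at hincle ⊢
    omega

-- evaluation of both ports on the rounding (≥ 5) branch, shared by the tight proof
set_option maxHeartbeats 2000000 in
lemma round_eval (sd : String) (n : Int) (hn : 0 ≤ n)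
    (hdot : (pvBody sd.toList).contains '.' = true)
    (hall : (pvPE (pvBody sd.toList) ++ pvFx (pvBody sd.toList) ++ pvPer (pvBody sd.toList)).all
      pvDig = true)
    (hearly : ¬ ((extendA (pvFx (pvBody sd.toList)) (pvPer (pvBody sd.toList)) n).length : Int) < n + 1)
    (c₀ : Char) (hgl : (pvDigs (pvBody sd.toList) n).getLast? = some c₀) (h53 : '5' ≤ c₀) :
    arrondi sd n = String.ofList ((if (parseB sd.toList).1 then ['-'] else []) ++
        aRound (pvDigs (pvBody sd.toList) n) (pvPE (pvBody sd.toList)).length) ∧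
      arrondi_alt sd n = String.ofList ((if (parseB sd.toList).1 then ['-'] else []) ++
        bRound (pvDigs (pvBody sd.toList) n) (pvPE (pvBody sd.toList)).length) ∧
      (∀ c ∈ pvDigs (pvBody sd.toList) n, pvDig c = true) ∧
      (pvPE (pvBody sd.toList)).length + 1 ≤ (pvDigs (pvBody sd.toList) n).length := by
  have hparts := parseB_parts sd.toList
  have hE1 : (explose_dec sd.toList).2.1 = (parseB sd.toList).2.1 :=
    congrArg (fun q => q.1) hparts
  have hE2 : (explose_dec sd.toList).2.2.1 = (parseB sd.toList).2.2.1 :=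
    congrArg (fun q => q.2.1) hparts
  have hE3 : (explose_dec sd.toList).2.2.2.1 = (parseB sd.toList).2.2.2 :=
    congrArg (fun q => q.2.2) hparts
  have hSgn := parseB_sgn sd.toList
  have hPP := prParse_parts sd.toList
  have hallm := hall
  simp only [List.all_append, Bool.and_eq_true, List.all_eq_true] at hallm
  obtain ⟨⟨hpedig, hfxdig⟩, hperdig⟩ := hallm
  have hp := wf_parse hdot hpedig hfxdig
  have hPQ := hPP
  rw [hp] at hPQ
  have hF1 : (parseB sd.toList).2.1 = pvPE (pvBody sd.toList) :=
    (congrArg (fun q => q.1) hPQ).symm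
  have hF2 : (parseB sd.toList).2.2.1 = pvFx (pvBody sd.toList) :=
    (congrArg (fun q => q.2.1) hPQ).symm
  have hF3 : (parseB sd.toList).2.2.2 = pvPer (pvBody sd.toList) :=
    (congrArg (fun q => q.2.2) hPQ).symm
  have hslice : PySem.List.slice
      (extendA (pvFx (pvBody sd.toList)) (pvPer (pvBody sd.toList)) n) none (some (n + 1))
      = (extendA (pvFx (pvBody sd.toList)) (pvPer (pvBody sd.toList)) n).take (n + 1).toNat :=
    PySem.List.slice_to _ (by omega)
  have hdigseq : pvPE (pvBody sd.toList) ++ PySem.List.slice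
      (extendA (pvFx (pvBody sd.toList)) (pvPer (pvBody sd.toList)) n) none (some (n + 1))
      = pvDigs (pvBody sd.toList) n := by
    rw [hslice, take_extendA, pvDigs]
  have hdigAll : ∀ d ∈ pvPE (pvBody sd.toList) ++ PySem.List.slice
      (extendA (pvFx (pvBody sd.toList)) (pvPer (pvBody sd.toList)) n) none (some (n + 1)),
      pvDig d = true := by
    intro d hdm
    rcases List.mem_append.mp hdm with hm | hm
    · exact hpedig d hm
    · rw [hslice] at hm
      exact extendLoopA_all_dig n hperdig _ _ hfxdig d (List.mem_of_mem_take hm)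
  have hdigsne : pvPE (pvBody sd.toList) ++ PySem.List.slice
      (extendA (pvFx (pvBody sd.toList)) (pvPer (pvBody sd.toList)) n) none (some (n + 1)) ≠ [] := by
    rw [hslice]
    intro hx
    rcases List.append_eq_nil_iff.mp hx with ⟨_, h2⟩
    have h3 := congrArg List.length h2
    rw [List.length_take] at h3
    simp only [List.length_nil] at h3
    omega
  have hgl' : (pvPE (pvBody sd.toList) ++ PySem.List.slice
      (extendA (pvFx (pvBody sd.toList)) (pvPer (pvBody sd.toList)) n) none (some (n + 1))).getLast?
      = some c₀ := by
    rw [hdigseq]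
    exact hgl
  have hdc₀ : pvDig c₀ = true := hdigAll c₀ (List.mem_of_getLast? hgl')
  have hlast : PySem.List.pyGet? (pvPE (pvBody sd.toList) ++ PySem.List.slice
      (extendA (pvFx (pvBody sd.toList)) (pvPer (pvBody sd.toList)) n) none (some (n + 1))) (-1)
      = some c₀ := by
    rw [pyGet_neg_one hdigsne]
    exact hgl'
  have h5i : (5 : Int) ≤ ((pvDval c₀ : Nat) : Int) := by
    have := (char_ge5 hdc₀).mp h53
    omega
  have hlt : ¬ c₀ < '5' := not_lt.mpr h53
  have htc1 : PySem.Int.toChars ((pvVal (pvPE (pvBody sd.toList) ++ PySem.List.slice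
      (extendA (pvFx (pvBody sd.toList)) (pvPer (pvBody sd.toList)) n) none (some (n + 1))) : Nat) : Int)
      = myDigs (pvVal (pvPE (pvBody sd.toList) ++ PySem.List.slice
      (extendA (pvFx (pvBody sd.toList)) (pvPer (pvBody sd.toList)) n) none (some (n + 1)))) := by
    rw [toChars_nonneg (Int.natCast_nonneg _), Int.toNat_natCast]
  have htc2 : PySem.Int.toChars (((pvVal (pvPE (pvBody sd.toList) ++ PySem.List.slice
      (extendA (pvFx (pvBody sd.toList)) (pvPer (pvBody sd.toList)) n) none (some (n + 1))) : Nat) : Int) + 5)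
      = myDigs (pvVal (pvPE (pvBody sd.toList) ++ PySem.List.slice
      (extendA (pvFx (pvBody sd.toList)) (pvPer (pvBody sd.toList)) n) none (some (n + 1))) + 5) := by
    have hcast : (((pvVal (pvPE (pvBody sd.toList) ++ PySem.List.slice
        (extendA (pvFx (pvBody sd.toList)) (pvPer (pvBody sd.toList)) n) none (some (n + 1))) : Nat) : Int) + 5)
        = (((pvVal (pvPE (pvBody sd.toList) ++ PySem.List.slice
        (extendA (pvFx (pvBody sd.toList)) (pvPer (pvBody sd.toList)) n) none (some (n + 1))) + 5 : Nat) : Int)) := by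
      push_cast
      ring
    rw [hcast, toChars_nonneg (Int.natCast_nonneg _), Int.toNat_natCast]
  have hlenpv : (pvPE (pvBody sd.toList)).length + 1 ≤ (pvPE (pvBody sd.toList) ++ PySem.List.slice
      (extendA (pvFx (pvBody sd.toList)) (pvPer (pvBody sd.toList)) n) none (some (n + 1))).length := by
    rw [hslice]
    simp only [List.length_append, List.length_take]
    omega
  refine ⟨?_, ?_, ?_, ?_⟩
  · rw [arrondi]
    simp only [hE1, hE2, hE3, hSgn, sgn_if, hF1, hF2, hF3]
    rw [if_neg hearly]
    simp only [hlast, pyInt_single hdc₀, pyInt_digits hdigAll hdigsne]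
    rw [if_pos h5i]
    simp only [htc1, htc2]
    rw [hdigseq]
    simp [aRound, List.append_assoc]
  · rw [arrondi_alt]
    simp only [extendB_caller_eq, hF1, hF2, hF3]
    rw [if_neg hearly]
    simp only [hlast]
    rw [if_neg hlt]
    rw [hdigseq]
    simp [bRound, List.append_assoc]
  · intro c hc
    rw [← hdigseq] at hc
    exact hdigAll c hc
  · rw [← hdigseq]
    exact hlenpv

lemma tight_main (sd : String) (n : Int) (hD : D_arrondi sd n) :
    arrondi sd n ≠ arrondi_alt sd n := by
  obtain ⟨hn, hst, hdot0, hall0, havail0, hh0, hl0, h90⟩ := hD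
  have hdot : (pvBody sd.toList).contains '.' = true := hdot0
  have hall : (pvPE (pvBody sd.toList) ++ pvFx (pvBody sd.toList) ++ pvPer (pvBody sd.toList)).all
      pvDig = true := hall0
  have havail : (n + 1 : Int) ≤ ((pvFx (pvBody sd.toList)).length : Int) ∨
      pvPer (pvBody sd.toList) ≠ [] := havail0
  have hh : (pvDigs (pvBody sd.toList) n).head? = some '0' := hh0
  have hlany : ((pvDigs (pvBody sd.toList) n).getLast?.any fun c => decide ('5' ≤ c)) = true := hl0
  have h9 : ((pvDigs (pvBody sd.toList) n).dropLast.dropWhile (· = '0')).all (· = '9') = true := h90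
  have hearly : ¬ ((extendA (pvFx (pvBody sd.toList)) (pvPer (pvBody sd.toList)) n).length : Int) < n + 1 := by
    rcases havail with h | h
    · by_cases hfxlen : ((pvFx (pvBody sd.toList)).length : Int) < n + 1
      · omega
      · rw [extendA_done _ _ _ hfxlen]
        omega
    · exact extendA_ge _ n h _
  obtain ⟨c₀, hgl, h53⟩ : ∃ c, (pvDigs (pvBody sd.toList) n).getLast? = some c ∧ '5' ≤ c := by
    cases hx : (pvDigs (pvBody sd.toList) n).getLast? with
    | none => rw [hx] at hlany; simp [Option.any] at hlany
    | some c =>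
      rw [hx] at hlany
      simp [Option.any] at hlany
      exact ⟨c, rfl, hlany⟩
  obtain ⟨hA, hB, hdall, hpvle⟩ := round_eval sd n hn hdot hall hearly c₀ hgl h53
  intro heq
  rw [hA, hB] at heq
  have hlist : ((if (parseB sd.toList).1 then ['-'] else []) ++
      aRound (pvDigs (pvBody sd.toList) n) (pvPE (pvBody sd.toList)).length)
      = ((if (parseB sd.toList).1 then ['-'] else []) ++
      bRound (pvDigs (pvBody sd.toList) n) (pvPE (pvBody sd.toList)).length) := by
    have := congrArg String.toList heq
    simpa using this
  have hlen := congrArg List.length hlist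
  simp only [List.length_append] at hlen
  obtain ⟨hla, hlb⟩ := tight_len (pvDigs (pvBody sd.toList) n) (pvPE (pvBody sd.toList)).length
    hdall c₀ hgl h53 hpvle hh h9
  omega

-- ===== VERDICT (by name: the statement is the Claim_ definition above) =====
theorem arrondi_spec : Claim_unchanged_arrondi := by
  intro sd n hDom hPre hnD
  exact claim_unchanged_main sd n hPre hnD

set_option maxRecDepth 100000 in
theorem arrondi_changed : Claim_changed_arrondi := by
  unfold Claim_changed_arrondi
  refine ⟨by decide, by decide, by decide, by decide, by decide, by decide⟩

theorem arrondi_tight : Claim_exact_arrondi := by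
  intro sd n hDom hPre hD
  exact tight_main sd n hD
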